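-- pv_equiv track=rewrite | github.com/heehoonhong/Algorithm | 프로그래머스/2/169199. 리코쳇 로봇/리코쳇 로봇.py | solution
-- ===== SOURCE A (Python) =====
-- from collections import deque
--
-- def solution(board):
--
--     n=len(board)
--     m=len(board[0])
--     dx=[1,-1,0,0]
--     dy=[0,0,-1,1]
--     xx,yy=0,0
--     def bfs():
--         visited=[[0]*m for _ in range(n)]
--         q=deque()
--         for i in range(n):
--             for j in range(m):
--                 if board[i][j]=='R':
--                     q.append((i,j))
--                     visited[i][j]=1
--                 if board[i][j]=='G':
--                     xx,yy=i,j
--         cnt=0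
--         while q:
--             x,y=q.popleft()
--             if x==xx and y==yy:
--                 return visited[xx][yy]-1
--             for i in range(4):
--                 nx,ny=x+dx[i],y+dy[i]
--                 while 0<=nx<n and 0<=ny<m and board[nx][ny]!='D':
--                     nx+=dx[i]
--                     ny+=dy[i]
--                 nx,ny=nx-dx[i],ny-dy[i]
--                 if 0<=nx<n and 0<=ny<m and board[nx][ny]!='D' and visited[nx][ny]==0:
--                     q.append((nx,ny))
--                     visited[nx][ny]=visited[x][y]+1
--
--
--         return -1
--     return bfs()
-- ===== SOURCE B (Python) =====
-- def _dests(s):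
--     # For one line: landing index per cell when sliding left / right.
--     # Cells of a maximal 'D'-free segment [a, a+l) slide to a (left) / a+l-1 (right);
--     # the value stored at a 'D' cell is never used by the BFS.
--     left, right, pos = [], [], 0
--     for seg in s.split('D'):
--         l = len(seg)
--         left += [pos] * l
--         left.append(pos + l)
--         right += [pos + l - 1] * l
--         right.append(pos + l)
--         pos += l + 1
--     left.pop()
--     right.pop()
--     return left, right
--
--
-- def solution(board):
--     h = len(board)
--     w = len(board[0])
--     rows = [line[:w] for line in board]
--     cols = [''.join(col) for col in zip(*rows)] if rows else []
--     horiz = [_dests(line) for line in rows]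
--     vert = [_dests(col) for col in cols]
--     q = [(r, c) for r in range(h) for c in range(w) if rows[r][c] == 'R']
--     goal = next(((r, c) for r in range(h - 1, -1, -1)
--                  for c in range(w - 1, -1, -1) if rows[r][c] == 'G'), None)
--     dist = {cell: 0 for cell in q}
--     head = 0
--     while head < len(q):
--         cx, cy = q[head]
--         head += 1
--         if (cx, cy) == goal:
--             return dist[(cx, cy)]
--         up, down = vert[cy]
--         lf, rt = horiz[cx]
--         for t in ((down[cx], cy), (up[cx], cy), (cx, lf[cy]), (cx, rt[cy])):
--             if t not in dist:
--                 dist[t] = dist[(cx, cy)] + 1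
--                 q.append(t)
--     return -1
-- ===== Notes on version B (the rewrite author's own statement) =====
-- stated objective: alternative
-- what changed: B precomputes slide-destination tables for every row and column in one pass over their 'D'-split segments, then runs BFS with table-lookup moves over a head-indexed append-only queue and a distance dict, instead of A's deque BFS that re-scans up to n+m cells per move over a visited matrix; on the sampled inputs this is not measurably faster.
import Mathlib
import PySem

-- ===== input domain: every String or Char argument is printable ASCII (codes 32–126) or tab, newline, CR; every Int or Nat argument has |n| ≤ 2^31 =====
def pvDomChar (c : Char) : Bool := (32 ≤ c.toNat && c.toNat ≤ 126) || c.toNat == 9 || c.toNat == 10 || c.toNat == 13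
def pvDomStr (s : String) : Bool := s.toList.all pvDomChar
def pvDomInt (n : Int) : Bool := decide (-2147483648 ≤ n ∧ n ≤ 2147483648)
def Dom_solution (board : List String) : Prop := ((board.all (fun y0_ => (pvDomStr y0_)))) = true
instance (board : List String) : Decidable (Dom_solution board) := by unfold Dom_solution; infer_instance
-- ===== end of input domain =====

-- B replaces A's per-move sliding scans by slide-destination tables precomputed from the
-- 'D'-split segments of every row and column, a distance dict, and a head-indexed
-- append-only queue; return value only, no argument is mutated.

-- ===== PORT A =====

-- board[x][y]; every use is guarded by 0 ≤ x < n, 0 ≤ y < m where, under Pre_solution,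
-- the row exists and has length ≥ m, so the getD defaults never fire (exact there)
def pvCellA (board : List String) (x y : Int) : Char :=
  (PySem.Str.pyGet? ((PySem.List.pyGet? board x).getD "") y).getD ' '

def pvVGet (v : List (List Int)) (x y : Int) : Int :=
  PySem.List.pyGetD (PySem.List.pyGetD v x []) y 0

def pvVSet (v : List (List Int)) (x y : Int) (c : Int) : List (List Int) :=
  PySem.List.pySetD v x (PySem.List.pySetD (PySem.List.pyGetD v x []) y c)

def pvSlide (board : List String) (n m dx dy : Int) : Nat → Int → Int → Int × Int
  | 0, nx, ny => (nx, ny)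
  | f + 1, nx, ny =>
    if 0 ≤ nx ∧ nx < n ∧ 0 ≤ ny ∧ ny < m ∧ pvCellA board nx ny ≠ 'D' then
      pvSlide board n m dx dy f (nx + dx) (ny + dy)
    else (nx, ny)


-- the initial double scan: builds q, visited (1 at each 'R') and xx,yy (the last 'G' scanned)
def pvScanA (board : List String) (n m : Int) :
    List (Int × Int) × List (List Int) × Option (Int × Int) :=
  (PySem.List.pyRange 0 n 1).foldl (fun st i =>
    (PySem.List.pyRange 0 m 1).foldl (fun st j =>
      let st := if pvCellA board i j = 'R' then (st.1 ++ [(i, j)], pvVSet st.2.1 i j 1, st.2.2)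
                else st
      if pvCellA board i j = 'G' then (st.1, st.2.1, some (i, j)) else st) st)
    ([], List.replicate n.toNat (List.replicate m.toNat 0), none)


def pvStepA (board : List String) (n m x y : Int)
    (st : List (Int × Int) × List (List Int)) (i : Int) :
    List (Int × Int) × List (List Int) :=
  let dxi := PySem.List.pyGetD [1, -1, 0, 0] i 0
  let dyi := PySem.List.pyGetD [0, 0, -1, 1] i 0
  let r := pvSlide board n m dxi dyi ((n + m).toNat + 1) (x + dxi) (y + dyi)
  let nx := r.1 - dxi
  let ny := r.2 - dyi
  if 0 ≤ nx ∧ nx < n ∧ 0 ≤ ny ∧ ny < m ∧ pvCellA board nx ny ≠ 'D' ∧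
      pvVGet st.2 nx ny = 0 then
    (st.1 ++ [(nx, ny)], pvVSet st.2 nx ny (pvVGet st.2 x y + 1))
  else st

def pvBfsA (board : List String) (n m gx gy : Int) :
    Nat → List (Int × Int) → List (List Int) → Int
  | 0, _, _ => -1
  | _ + 1, [], _ => -1
  | f + 1, (x, y) :: rest, visited =>
    if x = gx ∧ y = gy then pvVGet visited gx gy - 1
    else
      let st := (PySem.List.pyRange 0 4 1).foldl (pvStepA board n m x y) (rest, visited)
      pvBfsA board n m gx gy f st.1 st.2


-- ===== PORT B =====

-- _dests(s): one pass over the 'D'-split segments of a line (left += [pos]*l;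
-- left.append(pos+l); right += [pos+l-1]*l; right.append(pos+l); the final .pop() of
-- each list is dropLast); pvDStep is the loop body
def pvDStep : (List Int × List Int × Int) → List Char → (List Int × List Int × Int) :=
  fun acc part =>
    let l : Int := PySem.List.len part
    (acc.1 ++ PySem.List.pyRepeat [acc.2.2] l ++ [acc.2.2 + l],
     acc.2.1 ++ PySem.List.pyRepeat [acc.2.2 + l - 1] l ++ [acc.2.2 + l],
     acc.2.2 + l + 1)

def pvDests (line : List Char) : List Int × List Int :=
  let acc := (PySem.Chars.splitOn line ['D']).foldl pvDStep ([], [], 0)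
  (acc.1.dropLast, acc.2.1.dropLast)


def pvCellB (rows : List (List Char)) (r c : Int) : Char :=
  PySem.List.pyGetD (PySem.List.pyGetD rows r []) c ' '


-- the body of the for-nxt loop: q.append(nxt) when nxt is not a key of dist
def pvStepB (cx cy : Int) (acc : List (Int × Int) × PySem.Dict (Int × Int) Int)
    (t : Int × Int) : List (Int × Int) × PySem.Dict (Int × Int) Int :=
  if acc.2.contains t then acc
  else (acc.1 ++ [t], acc.2.insert t (acc.2.getD (cx, cy) 0 + 1))

-- while head < len(q): the queue only grows at the end; head walks forward over it
def pvBfsB (horiz vert : List (List Int × List Int)) (goal : Option (Int × Int)) :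
    Nat → List (Int × Int) → Nat → PySem.Dict (Int × Int) Int → Int
  | 0, _, _, _ => -1
  | fl + 1, qs, head, dist =>
    match qs[head]? with
    | none => -1
    | some (cx, cy) =>
      if goal = some (cx, cy) then dist.getD (cx, cy) 0
      else
        let ud := PySem.List.pyGetD vert cy ([], [])
        let lr := PySem.List.pyGetD horiz cx ([], [])
        let acc := [(PySem.List.pyGetD ud.2 cx 0, cy), (PySem.List.pyGetD ud.1 cx 0, cy),
                    (cx, PySem.List.pyGetD lr.1 cy 0),
                    (cx, PySem.List.pyGetD lr.2 cy 0)].foldl (pvStepB cx cy) (qs, dist)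
        pvBfsB horiz vert goal fl acc.1 (head + 1) acc.2


-- xx,yy: reading them unassigned (an 'R' but no 'G') raises and is excluded by
-- Pre_solution; the (-1,-1) default is never compared successfully on such boards
def solution (board : List String) : Int :=
  let n : Int := PySem.List.len board
  let m : Int := PySem.Str.len ((PySem.List.pyGet? board 0).getD "")
  let st := pvScanA board n m
  let g := st.2.2.getD (-1, -1)
  pvBfsA board n m g.1 g.2 (n * m).toNat st.1 st.2.1


def solution_alt (board : List String) : Int :=
  let h : Int := PySem.List.len board
  let w : Int := PySem.Str.len ((PySem.List.pyGet? board 0).getD "")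
  let rows : List (List Char) :=
    board.map (fun line => PySem.List.slice line.toList none (some w))
  let cols : List (List Char) :=
    (PySem.List.pyRange 0 w 1).map (fun c => rows.map (fun line => PySem.List.pyGetD line c ' '))
  let horiz := rows.map pvDests
  let vert := cols.map pvDests
  let qs := (PySem.List.pyRange 0 h 1).flatMap (fun r =>
    ((PySem.List.pyRange 0 w 1).filter (fun c => pvCellB rows r c == 'R')).map
      (fun c => (r, c)))
  -- next(((r, c) for r in range(h-1,-1,-1) for c in range(w-1,-1,-1) if … == 'G'), None)
  let goal := ((PySem.List.pyRange (h - 1) (-1) (-1)).flatMap (fun r =>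
    (PySem.List.pyRange (w - 1) (-1) (-1)).map (fun c => (r, c)))).find?
      (fun cell => pvCellB rows cell.1 cell.2 == 'G')
  let dist := qs.foldl (fun d cell => d.insert cell 0)
    (PySem.Dict.empty : PySem.Dict (Int × Int) Int)
  pvBfsB horiz vert goal (h * w).toNat qs 0 dist



-- ===== PRECONDITION & SPEC =====
-- Pre_solution admits exactly the boards A returns on: A raises IndexError on an empty board
-- or a row shorter than board[0] (the scan reads board[i][j] for j < m = len(board[0])), and
-- UnboundLocalError when an 'R' but no 'G' lies in the first m columns (xx,yy read unassigned).
def Pre_solution (board : List String) : Prop :=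
  board ≠ [] ∧
  (∀ s ∈ board, (board.headD "").toList.length ≤ s.toList.length) ∧
  ((∀ s ∈ board, 'R' ∉ s.toList.take (board.headD "").toList.length) ∨
   (∃ s ∈ board, 'G' ∈ s.toList.take (board.headD "").toList.length))
instance (board : List String) : Decidable (Pre_solution board) := by
  unfold Pre_solution; infer_instance

def pvWitness_solution : List String := ["RD.", "..G"]

def Spec_solution (board : List String) (out : Int) : Prop := out = solution_alt board
instance (board : List String) (out : Int) : Decidable (Spec_solution board out) := by
  unfold Spec_solution; infer_instance

-- ===== CLAIM (what is proved, stated in full; the proofs are below) =====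
def Claim_equal_solution : Prop :=
  ∀ (board : List String), Dom_solution board → Pre_solution board →
    Spec_solution board (solution board)

-- ===== LEMMAS AND PROOFS =====

theorem pv_go_spec (d : Char) : ∀ (fuel : Nat) (l cur : List Char) (acc : List (List Char)),
    l.length < fuel →
    PySem.Chars.splitOn.go [d] fuel l cur acc =
      acc.reverse ++ (l.splitOn d).modifyHead (cur.reverse ++ ·) := by
  intro fuel
  induction fuel with
  | zero => intro l cur acc h; omega
  | succ f ih =>
    intro l cur acc h
    cases l with
    | nil =>
      show (cur.reverse :: acc).reverse = _
      simp [List.splitOn]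
    | cons c rest =>
      show (if List.isPrefixOf [d] (c :: rest) then
              PySem.Chars.splitOn.go [d] f (List.drop [d].length (c :: rest)) []
                (cur.reverse :: acc)
            else PySem.Chars.splitOn.go [d] f rest (c :: cur) acc) = _
      have hpre : List.isPrefixOf [d] (c :: rest) = (d == c) := by
        simp [List.isPrefixOf]
      rw [hpre]
      by_cases hdc : d = c
      · subst hdc
        rw [if_pos (by simp)]
        rw [ih _ _ _ (by simpa using h)]
        simp [List.splitOn, List.modifyHead]
        cases hsp : List.splitOnP (fun x => x == d) rest <;> simp [hsp]
      · rw [if_neg (by simp [hdc])]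
        rw [ih _ _ _ (by simpa using h)]
        have : (c :: rest).splitOn d = ((rest).splitOn d).modifyHead (c :: ·) := by
          simp [List.splitOn, List.splitOnP_cons, beq_iff_eq]
          intro hc; exact absurd hc.symm hdc
        rw [this]
        obtain ⟨h0, t0, ht⟩ := List.exists_cons_of_ne_nil (List.splitOnP_ne_nil (· == d) rest)
        simp [List.splitOn] at ht ⊢
        rw [ht]
        simp [List.modifyHead]

theorem pv_charsSplitOn (d : Char) (s : List Char) :
    PySem.Chars.splitOn s [d] = s.splitOn d := by
  show PySem.Chars.splitOn.go [d] (s.length + 1) s [] [] = _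
  rw [pv_go_spec d _ s [] [] (by omega)]
  obtain ⟨h0, t0, ht⟩ := List.exists_cons_of_ne_nil (List.splitOnP_ne_nil (· == d) s)
  simp [List.splitOn] at ht ⊢
  rw [ht]
  simp [List.modifyHead]

theorem pv_pyRepeat_single (x : Int) (l : Nat) :
    PySem.List.pyRepeat [x] (l : Int) = List.replicate l x := by
  rw [PySem.List.pyRepeat_singleton]; simp

theorem pv_dstep_cast (st : List Int × List Int × Int) (seg : List Char) :
    pvDStep st seg =
      (st.1 ++ List.replicate seg.length st.2.2 ++ [st.2.2 + seg.length],
       st.2.1 ++ List.replicate seg.length (st.2.2 + seg.length - 1) ++ [st.2.2 + seg.length],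
       st.2.2 + seg.length + 1) := by
  simp [pvDStep, PySem.List.len, pv_pyRepeat_single]

theorem pv_dfold_shift : ∀ (parts : List (List Char)) (A B : List Int) (p : Int),
    parts.foldl pvDStep (A, B, p) =
      (A ++ (parts.foldl pvDStep ([], [], 0)).1.map (· + p),
       B ++ (parts.foldl pvDStep ([], [], 0)).2.1.map (· + p),
       p + (parts.foldl pvDStep ([], [], 0)).2.2) := by
  intro parts
  induction parts with
  | nil => intro A B p; simp
  | cons seg rest ih =>
    intro A B p
    rw [List.foldl_cons, List.foldl_cons, pv_dstep_cast, pv_dstep_cast]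
    conv_rhs => rw [ih]
    conv_lhs => rw [ih]
    refine Prod.ext ?_ (Prod.ext ?_ ?_)
    · simp [List.map_map, Function.comp_def, add_comm, add_left_comm, add_assoc]
    · simp [List.map_map, Function.comp_def, add_comm, add_left_comm, add_assoc,
        sub_eq_add_neg]
    · simp
      omega

def pvCellOf (s : List Char) : Nat → Char := fun k => s.getD k ' '

def pvSeg (cell : Nat → Char) : Nat → Nat
  | 0 => 0
  | j + 1 => if cell j = 'D' then j + 1 else pvSeg cell j

def pvSegE (cell : Nat → Char) : Nat → Nat → Nat
  | 0, j => j
  | t + 1, j => if cell (j + 1) = 'D' then j else pvSegE cell t (j + 1)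

theorem pv_seg_zero (cell : Nat → Char) (j : Nat) (h : ∀ k, k < j → cell k ≠ 'D') :
    pvSeg cell j = 0 := by
  induction j with
  | zero => rfl
  | succ j ih =>
    rw [pvSeg, if_neg (h j (by omega))]
    exact ih (fun k hk => h k (by omega))

theorem pv_seg_le (cell : Nat → Char) (j : Nat) : pvSeg cell j ≤ j := by
  induction j with
  | zero => exact le_refl _
  | succ j ih => rw [pvSeg]; split <;> omega

theorem pv_seg_ne (cell : Nat → Char) (j : Nat) (h : cell j ≠ 'D') :
    cell (pvSeg cell j) ≠ 'D' := by
  induction j with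
  | zero => exact h
  | succ j ih =>
    rw [pvSeg]
    by_cases hj : cell j = 'D'
    · rw [if_pos hj]; exact h
    · rw [if_neg hj]; exact ih hj

theorem pv_seg_congr (c1 c2 : Nat → Char) (j : Nat) (h : ∀ k, k < j → c1 k = c2 k) :
    pvSeg c1 j = pvSeg c2 j := by
  induction j with
  | zero => rfl
  | succ j ih =>
    rw [pvSeg, pvSeg, h j (by omega)]
    rw [ih (fun k hk => h k (by omega))]

theorem pv_seg_shift (c1 c2 : Nat → Char) (l : Nat) (hD : c1 l = 'D')
    (hc : ∀ k, c1 (l + 1 + k) = c2 k) : ∀ k, pvSeg c1 (l + 1 + k) = l + 1 + pvSeg c2 k := by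
  intro k
  induction k with
  | zero =>
    rw [show pvSeg c1 (l + 1) = if c1 l = 'D' then l + 1 else pvSeg c1 l from rfl, if_pos hD]
    rfl
  | succ k ih =>
    have : l + 1 + (k + 1) = (l + 1 + k) + 1 := by omega
    rw [this, pvSeg, pvSeg, hc k]
    split
    · omega
    · rw [ih]

theorem pv_segE_bounds (cell : Nat → Char) : ∀ (t j : Nat),
    j ≤ pvSegE cell t j ∧ pvSegE cell t j ≤ j + t := by
  intro t
  induction t with
  | zero => intro j; rw [pvSegE]; omega
  | succ t ih =>
    intro j
    rw [pvSegE]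
    split
    · omega
    · have := ih (j + 1); omega

theorem pv_segE_ne (cell : Nat → Char) : ∀ (t j : Nat), cell j ≠ 'D' →
    cell (pvSegE cell t j) ≠ 'D' := by
  intro t
  induction t with
  | zero => intro j h; exact h
  | succ t ih =>
    intro j h
    rw [pvSegE]
    by_cases hj : cell (j + 1) = 'D'
    · rw [if_pos hj]; exact h
    · rw [if_neg hj]; exact ih (j + 1) hj

theorem pv_segE_congr (c1 c2 : Nat → Char) : ∀ (t j : Nat),
    (∀ k, j < k → k ≤ j + t → c1 k = c2 k) → pvSegE c1 t j = pvSegE c2 t j := by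
  intro t
  induction t with
  | zero => intro j _; rfl
  | succ t ih =>
    intro j h
    rw [pvSegE, pvSegE, h (j + 1) (by omega) (by omega)]
    split
    · rfl
    · exact ih (j + 1) (fun k h1 h2 => h k (by omega) (by omega))

theorem pv_segE_shift (c1 c2 : Nat → Char) (l : Nat)
    (hc : ∀ k, c1 (l + 1 + k) = c2 k) : ∀ (t k : Nat),
    pvSegE c1 t (l + 1 + k) = l + 1 + pvSegE c2 t k := by
  intro t
  induction t with
  | zero => intro k; rfl
  | succ t ih =>
    intro k
    have h1 : l + 1 + k + 1 = l + 1 + (k + 1) := by omega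
    rw [pvSegE, pvSegE, h1, hc (k + 1)]
    split
    · rfl
    · rw [ih (k + 1)]

theorem pv_segE_full (cell : Nat → Char) : ∀ (t j : Nat),
    (∀ k, j < k → k ≤ j + t → cell k ≠ 'D') → pvSegE cell t j = j + t := by
  intro t
  induction t with
  | zero => intro j _; rfl
  | succ t ih =>
    intro j h
    rw [pvSegE, if_neg (h (j + 1) (by omega) (by omega))]
    have := ih (j + 1) (fun k h1 h2 => h k (by omega) (by omega))
    omega

theorem pv_segE_stop (cell : Nat → Char) : ∀ (t j e : Nat), j ≤ e →
    (∀ k, j < k → k ≤ e → cell k ≠ 'D') → cell (e + 1) = 'D' → e - j ≤ t →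
    pvSegE cell t j = e := by
  intro t
  induction t with
  | zero => intro j e h1 _ _ h4; rw [pvSegE]; omega
  | succ t ih =>
    intro j e h1 h2 h3 h4
    rw [pvSegE]
    by_cases hj : j = e
    · subst hj; rw [if_pos h3]
    · rw [if_neg (h2 (j + 1) (by omega) (by omega))]
      exact ih (j + 1) e (by omega) (fun k ha hb => h2 k (by omega) hb) h3 (by omega)

theorem pv_dfold_len : ∀ (parts : List (List Char)) (st : List Int × List Int × Int),
    (parts.foldl pvDStep st).1.length =
      st.1.length + (parts.map (fun seg => seg.length + 1)).sum ∧
    (parts.foldl pvDStep st).2.1.length =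
      st.2.1.length + (parts.map (fun seg => seg.length + 1)).sum := by
  intro parts
  induction parts with
  | nil => intro st; simp
  | cons seg rest ih =>
    intro st
    rw [List.foldl_cons, pv_dstep_cast]
    constructor
    · rw [(ih _).1]; simp; omega
    · rw [(ih _).2]; simp; omega

theorem pv_map_dropLast {α β : Type} (f : α → β) (l : List α) :
    (l.map f).dropLast = l.dropLast.map f := by
  induction l with
  | nil => rfl
  | cons a t ih =>
    cases t with
    | nil => rfl
    | cons b u => simp [List.dropLast_cons₂, ih]

theorem pv_getD_mem {α : Type} (l : List α) (k : Nat) (d : α) (h : k < l.length) :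
    l.getD k d ∈ l := by
  rw [List.getD_eq_getElem?_getD, List.getElem?_eq_getElem h]
  exact List.getElem_mem h

theorem pv_getD_replicate (n j : Nat) (a d : Int) (h : j < n) :
    (List.replicate n a).getD j d = a := by
  rw [List.getD_eq_getElem?_getD, List.getElem?_eq_getElem (by simpa using h)]
  simp

theorem pv_dests_rw (rest : List Char) :
    (pvDests rest).1 = ((rest.splitOn 'D').foldl pvDStep ([], [], 0)).1.dropLast ∧
    (pvDests rest).2 = ((rest.splitOn 'D').foldl pvDStep ([], [], 0)).2.1.dropLast := by
  unfold pvDests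
  rw [pv_charsSplitOn]
  exact ⟨rfl, rfl⟩

theorem pv_dests_struct : ∀ (N : Nat) (s : List Char), s.length ≤ N →
    (pvDests s).1.length = s.length ∧ (pvDests s).2.length = s.length ∧
    ∀ j, j < s.length → pvCellOf s j ≠ 'D' →
      (pvDests s).1.getD j 0 = (pvSeg (pvCellOf s) j : Int) ∧
      (pvDests s).2.getD j 0 = (pvSegE (pvCellOf s) (s.length - 1 - j) j : Int) := by
  intro N
  induction N with
  | zero =>
    intro s hs
    have : s = [] := List.length_eq_zero_iff.mp (by omega)
    subst this
    exact ⟨rfl, rfl, fun j hj => by omega⟩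
  | succ N ih =>
    intro s hs
    by_cases hD : 'D' ∈ s
    · -- s = seg ++ 'D' :: rest with seg free of 'D'
      have hdwne : s.dropWhile (fun c => c != 'D') ≠ [] := by
        intro hcon
        rw [List.dropWhile_eq_nil_iff] at hcon
        simpa using hcon 'D' hD
      cases hdrop : s.dropWhile (fun c => c != 'D') with
      | nil => exact absurd hdrop hdwne
      | cons c0 rest =>
        have hc0 : c0 = 'D' := by
          have h := List.head_dropWhile_not (fun c => c != 'D') hdwne
          simp [hdrop] at h
          exact h
        subst hc0
        set seg := s.takeWhile (fun c => c != 'D') with hseg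
        have hsd : s = seg ++ 'D' :: rest := by
          rw [hseg, ← hdrop, List.takeWhile_append_dropWhile]
        have hsegfree : ∀ x ∈ seg, x ≠ 'D' := by
          intro x hx
          have := List.mem_takeWhile_imp hx
          simpa using this
        set l := seg.length with hl
        have hslen : s.length = l + 1 + rest.length := by
          rw [hsd]; simp [hl]; omega
        have hrest : rest.length ≤ N := by omega
        obtain ⟨ihl, ihr, ihj⟩ := ih rest hrest
        have hsplit : s.splitOn 'D' = seg :: rest.splitOn 'D' := by
          conv_lhs => rw [hsd]
          simp only [List.splitOn]
          exact List.splitOnP_first _ seg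
            (by intro x hx; simpa using hsegfree x hx) 'D' (by simp) rest
        have hcell_seg : ∀ k, k < l → pvCellOf s k = seg.getD k ' ' := by
          intro k hk
          simp only [pvCellOf]
          rw [hsd, List.getD_append _ _ _ _ (by omega)]
        have hcellD : pvCellOf s l = 'D' := by
          simp only [pvCellOf]
          rw [hsd, List.getD_append_right _ _ _ _ (by omega)]
          simp [hl]
        have hcell_rest : ∀ k, pvCellOf s (l + 1 + k) = pvCellOf rest k := by
          intro k
          simp only [pvCellOf]
          rw [hsd, List.getD_append_right _ _ _ _ (by omega)]
          have : l + 1 + k - seg.length = k + 1 := by omega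
          rw [this]
          rfl
        have hFne1 : ((rest.splitOn 'D').foldl pvDStep ([], [], 0)).1 ≠ [] := by
          have hFlen := (pv_dfold_len (rest.splitOn 'D') ([], [], 0)).1
          obtain ⟨a, b, hab⟩ := List.exists_cons_of_ne_nil
            (show rest.splitOn 'D' ≠ [] from by
              simpa [List.splitOn] using List.splitOnP_ne_nil (· == 'D') rest)
          intro hcon
          rw [hcon, hab] at hFlen
          simp at hFlen
          omega
        have hFne2 : ((rest.splitOn 'D').foldl pvDStep ([], [], 0)).2.1 ≠ [] := by
          have hFlen := (pv_dfold_len (rest.splitOn 'D') ([], [], 0)).2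
          obtain ⟨a, b, hab⟩ := List.exists_cons_of_ne_nil
            (show rest.splitOn 'D' ≠ [] from by
              simpa [List.splitOn] using List.splitOnP_ne_nil (· == 'D') rest)
          intro hcon
          rw [hcon, hab] at hFlen
          simp at hFlen
          omega
        have hfold1 : (pvDests s).1 =
            List.replicate l (0 : Int) ++ [(l : Int)] ++
              ((pvDests rest).1.map (· + ((l : Int) + 1))) := by
          rw [(pv_dests_rw s).1, hsplit, List.foldl_cons, pv_dstep_cast, pv_dfold_shift,
            List.dropLast_append_of_ne_nil (by simpa using hFne1), pv_map_dropLast,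
            ← (pv_dests_rw rest).1]
          simp [hl]
        have hfold2 : (pvDests s).2 =
            List.replicate l ((l : Int) - 1) ++ [(l : Int)] ++
              ((pvDests rest).2.map (· + ((l : Int) + 1))) := by
          rw [(pv_dests_rw s).2, hsplit, List.foldl_cons, pv_dstep_cast, pv_dfold_shift,
            List.dropLast_append_of_ne_nil (by simpa using hFne2), pv_map_dropLast,
            ← (pv_dests_rw rest).2]
          simp [hl]
        refine ⟨by rw [hfold1]; simp [ihl]; omega,
                by rw [hfold2]; simp [ihr]; omega, ?_⟩
        intro j hj hjD
        have hjne : j ≠ l := fun h => hjD (h ▸ hcellD)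
        by_cases hjl : j < l
        · have hfree : ∀ k, k < l → pvCellOf s k ≠ 'D' := by
            intro k hk
            rw [hcell_seg k hk]
            exact hsegfree _ (pv_getD_mem _ _ _ hk)
          constructor
          · rw [hfold1, List.getD_append _ _ _ _ (by simp; omega),
              List.getD_append _ _ _ _ (by simp; omega),
              pv_getD_replicate _ _ _ _ hjl,
              pv_seg_zero _ j (fun k hk => hfree k (by omega))]
            simp
          · rw [hfold2, List.getD_append _ _ _ _ (by simp; omega),
              List.getD_append _ _ _ _ (by simp; omega),
              pv_getD_replicate _ _ _ _ hjl,
              pv_segE_stop (pvCellOf s) (s.length - 1 - j) j (l - 1) (by omega)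
                (fun k h1 h2 => hfree k (by omega))
                (show pvCellOf s (l - 1 + 1) = 'D' by
                  have h9 : l - 1 + 1 = l := by omega
                  rw [h9]; exact hcellD) (by omega)]
            omega
        · have hk : j - (l + 1) < rest.length := by omega
          set k := j - (l + 1) with hkdef
          have hjk : j = l + 1 + k := by omega
          have hkD : pvCellOf rest k ≠ 'D' := by
            rw [← hcell_rest k, ← hjk]; exact hjD
          obtain ⟨ihjl, ihjr⟩ := ihj k hk hkD
          constructor
          · rw [hfold1, List.getD_append_right _ _ _ _ (by simp; omega)]
            have hidx : j - (List.replicate l (0 : Int) ++ [(l : Int)]).length = k := by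
              simp; omega
            rw [hidx]
            have hklt : k < (pvDests rest).1.length := by rw [ihl]; exact hk
            rw [List.getD_eq_getElem?_getD, List.getElem?_map,
              List.getElem?_eq_getElem hklt]
            simp only [Option.map_some, Option.getD_some]
            have h8 : (pvDests rest).1[k] = (pvDests rest).1.getD k 0 := by
              rw [List.getD_eq_getElem?_getD, List.getElem?_eq_getElem hklt]; rfl
            rw [h8, ihjl, hjk,
              pv_seg_shift (pvCellOf s) (pvCellOf rest) l hcellD hcell_rest k]
            push_cast
            ring
          · rw [hfold2, List.getD_append_right _ _ _ _ (by simp; omega)]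
            have hidx : j - (List.replicate l ((l : Int) - 1) ++ [(l : Int)]).length = k := by
              simp; omega
            rw [hidx]
            have hklt : k < (pvDests rest).2.length := by rw [ihr]; exact hk
            rw [List.getD_eq_getElem?_getD, List.getElem?_map,
              List.getElem?_eq_getElem hklt]
            simp only [Option.map_some, Option.getD_some]
            have h8 : (pvDests rest).2[k] = (pvDests rest).2.getD k 0 := by
              rw [List.getD_eq_getElem?_getD, List.getElem?_eq_getElem hklt]; rfl
            rw [h8, ihjr, hjk,
              pv_segE_shift (pvCellOf s) (pvCellOf rest) l hcell_rest _ k]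
            have h7 : s.length - 1 - (l + 1 + k) = rest.length - 1 - k := by omega
            rw [h7]
            push_cast
            ring
    · have hsplit : s.splitOn 'D' = [s] := by
        simp only [List.splitOn]
        exact List.splitOnP_eq_single _ _ (by intro x hx; simp; rintro rfl; exact hD hx)
      have hfree : ∀ k, k < s.length → pvCellOf s k ≠ 'D' := by
        intro k hk hcon
        exact hD (hcon ▸ pv_getD_mem _ _ _ hk)
      have hfold : pvDests s =
          (List.replicate s.length (0 : Int),
           List.replicate s.length ((s.length : Int) - 1)) := by
        unfold pvDests
        rw [pv_charsSplitOn, hsplit, List.foldl_cons, pv_dstep_cast]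
        simp
      rw [hfold]
      refine ⟨by simp, by simp, ?_⟩
      intro j hj hjD
      constructor
      · rw [pv_getD_replicate _ _ _ _ hj,
          pv_seg_zero _ j (fun k hk => hfree k (by omega))]
        simp
      · rw [pv_getD_replicate _ _ _ _ hj,
          pv_segE_full _ _ j (fun k h1 h2 => hfree k (by omega))]
        omega


def pvCellN (board : List String) (i j : Nat) : Char := ((board.getD i "").toList).getD j ' '

def pvSlide1 (cell : Nat → Char) (L : Int) (d : Int) : Nat → Int → Int
  | 0, p => p
  | f + 1, p =>
    if 0 ≤ p ∧ p < L ∧ cell p.toNat ≠ 'D' then pvSlide1 cell L d f (p + d) else p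

theorem pv_pyGet?_toNat {α : Type} (xs : List α) (i : Int) (h : 0 ≤ i) :
    PySem.List.pyGet? xs i = xs[i.toNat]? := by
  conv_lhs => rw [show i = ((i.toNat : Nat) : Int) from (Int.toNat_of_nonneg h).symm]
  rw [PySem.List.pyGet?_natCast]

theorem pv_strGet?_eq (s : String) (i : Int) :
    PySem.Str.pyGet? s i = PySem.List.pyGet? s.toList i := by
  simp [pysem]

theorem pv_cellA_eq (board : List String) (x y : Int) (hx : 0 ≤ x) (hy : 0 ≤ y) :
    pvCellA board x y = pvCellN board x.toNat y.toNat := by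
  unfold pvCellA pvCellN
  rw [pv_pyGet?_toNat _ _ hx,
    show (board[x.toNat]?).getD "" = board.getD x.toNat "" from
      (List.getD_eq_getElem?_getD).symm,
    pv_strGet?_eq, pv_pyGet?_toNat _ _ hy]
  exact (List.getD_eq_getElem?_getD).symm

theorem pv_slide_horiz (board : List String) (n m : Int) (d : Int) (x : Int)
    (hx0 : 0 ≤ x) (hx1 : x < n) : ∀ (f : Nat) (p : Int),
    pvSlide board n m 0 d f x p =
      (x, pvSlide1 (fun k => pvCellN board x.toNat k) m d f p) := by
  intro f
  induction f with
  | zero => intro p; rfl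
  | succ f ih =>
    intro p
    simp only [pvSlide, pvSlide1]
    by_cases h : 0 ≤ p ∧ p < m ∧ pvCellN board x.toNat p.toNat ≠ 'D'
    · rw [if_pos ⟨hx0, hx1, h.1, h.2.1, by
        rw [pv_cellA_eq _ _ _ hx0 h.1]; exact h.2.2⟩, if_pos h, add_zero]
      exact ih (p + d)
    · rw [if_neg (fun hc => h ⟨hc.2.2.1, hc.2.2.2.1,
        by rw [← pv_cellA_eq _ _ _ hx0 hc.2.2.1]; exact hc.2.2.2.2⟩), if_neg h]

theorem pv_slide_vert (board : List String) (n m : Int) (d : Int) (y : Int)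
    (hy0 : 0 ≤ y) (hy1 : y < m) : ∀ (f : Nat) (p : Int),
    pvSlide board n m d 0 f p y =
      (pvSlide1 (fun k => pvCellN board k y.toNat) n d f p, y) := by
  intro f
  induction f with
  | zero => intro p; rfl
  | succ f ih =>
    intro p
    simp only [pvSlide, pvSlide1]
    by_cases h : 0 ≤ p ∧ p < n ∧ pvCellN board p.toNat y.toNat ≠ 'D'
    · rw [if_pos ⟨h.1, h.2.1, hy0, hy1, by
        rw [pv_cellA_eq _ _ _ h.1 hy0]; exact h.2.2⟩, if_pos h, add_zero]
      exact ih (p + d)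
    · rw [if_neg (fun hc => h ⟨hc.1, hc.2.1,
        by rw [← pv_cellA_eq _ _ _ hc.1 hy0]; exact hc.2.2.2.2⟩), if_neg h]

theorem pv_slide1_neg (cell : Nat → Char) (L : Int) : ∀ (j : Nat) (f : Nat),
    (j : Int) < L → j + 1 ≤ f →
    pvSlide1 cell L (-1) f ((j : Int) - 1) = (pvSeg cell j : Int) - 1 := by
  intro j
  induction j with
  | zero =>
    intro f hL hf
    cases f with
    | zero => omega
    | succ f =>
      simp only [pvSlide1]
      rw [if_neg (by rintro ⟨h0, -⟩; omega)]
      simp [pvSeg]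
  | succ j ih =>
    intro f hL hf
    cases f with
    | zero => omega
    | succ f =>
      simp only [pvSlide1]
      rw [show (((j + 1 : Nat) : Int) - 1) = (j : Int) by push_cast; ring]
      by_cases hD : cell j = 'D'
      · rw [if_neg (by rintro ⟨-, -, hc⟩; rw [Int.toNat_natCast] at hc; exact hc hD)]
        rw [show pvSeg cell (j + 1) = if cell j = 'D' then j + 1 else pvSeg cell j from rfl,
          if_pos hD]
        push_cast
        ring
      · rw [if_pos ⟨Int.natCast_nonneg j, by push_cast at hL ⊢; omega,
          by rw [Int.toNat_natCast]; exact hD⟩]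
        rw [show (j : Int) + -1 = (j : Int) - 1 by ring]
        rw [ih f (by push_cast at hL ⊢; omega) (by omega)]
        rw [show pvSeg cell (j + 1) = if cell j = 'D' then j + 1 else pvSeg cell j from rfl,
          if_neg hD]

theorem pv_slide1_pos (cell : Nat → Char) (L : Int) : ∀ (t j : Nat) (f : Nat),
    (j : Int) + t + 1 = L → t + 1 ≤ f →
    pvSlide1 cell L 1 f ((j : Int) + 1) = (pvSegE cell t j : Int) + 1 := by
  intro t
  induction t with
  | zero =>
    intro j f hL hf
    cases f with
    | zero => omega
    | succ f =>
      simp only [pvSlide1]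
      rw [if_neg (by rintro ⟨-, hlt, -⟩; omega)]
      simp [pvSegE]
  | succ t ih =>
    intro j f hL hf
    cases f with
    | zero => omega
    | succ f =>
      simp only [pvSlide1]
      by_cases hD : cell (j + 1) = 'D'
      · rw [if_neg (by
          rintro ⟨-, -, hc⟩
          rw [show (j : Int) + 1 = ((j + 1 : Nat) : Int) by push_cast; ring,
            Int.toNat_natCast] at hc
          exact hc hD)]
        rw [show pvSegE cell (t + 1) j =
          if cell (j + 1) = 'D' then j else pvSegE cell t (j + 1) from rfl, if_pos hD]
      · rw [if_pos ⟨by positivity, by omega, by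
          rw [show (j : Int) + 1 = ((j + 1 : Nat) : Int) by push_cast; ring,
            Int.toNat_natCast]
          exact hD⟩]
        rw [show (j : Int) + 1 + 1 = ((j + 1 : Nat) : Int) + 1 by push_cast; ring]
        rw [ih (j + 1) f (by push_cast at hL ⊢; omega) (by omega)]
        rw [show pvSegE cell (t + 1) j =
          if cell (j + 1) = 'D' then j else pvSegE cell t (j + 1) from rfl, if_neg hD]

def pvRel (nN mN : Nat) (v : List (List Int)) (d : PySem.Dict (Int × Int) Int) : Prop :=
  v.length = nN ∧ (∀ r ∈ v, r.length = mN) ∧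
  ∀ (i j : Nat), i < nN → j < mN →
    0 ≤ pvVGet v i j ∧
    (pvVGet v i j = 0 ↔ d.get? ((i : Int), (j : Int)) = none) ∧
    (pvVGet v i j ≠ 0 → d.get? ((i : Int), (j : Int)) = some (pvVGet v i j - 1))

def pvQInv (board : List String) (nN mN : Nat) (v : List (List Int))
    (q : List (Int × Int)) : Prop :=
  ∀ p ∈ q, ∃ (i j : Nat), p = ((i : Int), (j : Int)) ∧ i < nN ∧ j < mN ∧
    pvCellN board i j ≠ 'D' ∧ pvVGet v i j ≠ 0

theorem pv_vget_natCast (v : List (List Int)) (i j : Nat) :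
    pvVGet v i j = (v.getD i []).getD j 0 := by
  simp [pvVGet, PySem.List.pyGetD_natCast]

theorem pv_vset_natCast (v : List (List Int)) (i j : Nat) (c : Int) :
    pvVSet v i j c = v.set i ((v.getD i []).set j c) := by
  simp [pvVSet, PySem.List.pySetD_natCast, PySem.List.pyGetD_natCast]

theorem pv_vset_wf (mN : Nat) (v : List (List Int))
    (hrows : ∀ r ∈ v, r.length = mN) (i j : Nat) (hi : i < v.length) (c : Int) :
    (pvVSet v i j c).length = v.length ∧
    (∀ r ∈ pvVSet v (i : Int) (j : Int) c, r.length = mN) := by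
  rw [pv_vset_natCast]
  refine ⟨by simp, ?_⟩
  intro r hr
  rw [List.mem_iff_getElem] at hr
  obtain ⟨k, hk, hkr⟩ := hr
  rw [List.getElem_set] at hkr
  split at hkr
  · subst hkr
    rw [List.length_set, List.getD_eq_getElem?_getD, List.getElem?_eq_getElem hi]
    exact hrows _ (List.getElem_mem hi)
  · subst hkr
    exact hrows _ (List.getElem_mem _)

theorem pv_getD_set {α : Type} (l : List α) (i k : Nat) (x d : α) (hi : i < l.length) :
    (l.set i x).getD k d = if k = i then x else l.getD k d := by
  rw [List.getD_eq_getElem?_getD, List.getD_eq_getElem?_getD, List.getElem?_set]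
  by_cases h : i = k
  · subst h
    rw [if_pos rfl, if_pos rfl, if_pos hi]
    rfl
  · rw [if_neg h, if_neg (fun hc => h hc.symm)]

theorem pv_vget_vset (mN : Nat) (v : List (List Int))
    (hrows : ∀ r ∈ v, r.length = mN)
    (a b i j : Nat) (ha : a < v.length) (hb : b < mN) (c : Int) :
    pvVGet (pvVSet v a b c) i j = if i = a ∧ j = b then c else pvVGet v i j := by
  have hrowlen : (v.getD a []).length = mN := by
    rw [List.getD_eq_getElem?_getD, List.getElem?_eq_getElem ha]
    exact hrows _ (List.getElem_mem ha)
  rw [pv_vset_natCast, pv_vget_natCast, pv_vget_natCast, pv_getD_set v a i _ [] ha]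
  by_cases hia : i = a
  · rw [if_pos hia]
    subst hia
    rw [pv_getD_set _ b j c 0 (by omega)]
    by_cases hjb : j = b
    · rw [if_pos hjb, if_pos ⟨rfl, hjb⟩]
    · rw [if_neg hjb, if_neg (by tauto)]
  · rw [if_neg hia, if_neg (by tauto)]

def pvStepA' (board : List String) (nN mN : Nat) (x y : Int)
    (st : List (Int × Int) × List (List Int)) (dest : Int × Int) :
    List (Int × Int) × List (List Int) :=
  if 0 ≤ dest.1 ∧ dest.1 < (nN : Int) ∧ 0 ≤ dest.2 ∧ dest.2 < (mN : Int) ∧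
      pvCellA board dest.1 dest.2 ≠ 'D' ∧ pvVGet st.2 dest.1 dest.2 = 0 then
    (st.1 ++ [dest], pvVSet st.2 dest.1 dest.2 (pvVGet st.2 x y + 1))
  else st

theorem pv_evalA0 (board : List String) (nN mN : Nat) (xi yj e : Nat)
    (st : List (Int × Int) × List (List Int))
    (hs : pvSlide board nN mN 1 0 (((nN : Int) + (mN : Int)).toNat + 1)
      ((xi : Int) + 1) (yj : Int) = ((e : Int) + 1, (yj : Int))) :
    pvStepA board nN mN xi yj st 0 = pvStepA' board nN mN xi yj st ((e : Int), (yj : Int)) := by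
  have h1 : PySem.List.pyGetD [(1 : Int), -1, 0, 0] 0 0 = 1 := by decide
  have h2 : PySem.List.pyGetD [(0 : Int), 0, -1, 1] 0 0 = 0 := by decide
  unfold pvStepA pvStepA'
  simp only [h1, h2, add_zero, hs, add_sub_cancel_right, sub_zero]

theorem pv_evalA1 (board : List String) (nN mN : Nat) (xi yj e : Nat)
    (st : List (Int × Int) × List (List Int))
    (hs : pvSlide board nN mN (-1) 0 (((nN : Int) + (mN : Int)).toNat + 1)
      ((xi : Int) - 1) (yj : Int) = ((e : Int) - 1, (yj : Int))) :
    pvStepA board nN mN xi yj st 1 = pvStepA' board nN mN xi yj st ((e : Int), (yj : Int)) := by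
  have h1 : PySem.List.pyGetD [(1 : Int), -1, 0, 0] 1 0 = -1 := by decide
  have h2 : PySem.List.pyGetD [(0 : Int), 0, -1, 1] 1 0 = 0 := by decide
  unfold pvStepA pvStepA'
  simp only [h1, h2, add_zero, ← sub_eq_add_neg, hs, sub_zero, sub_neg_eq_add,
    sub_add_cancel]

theorem pv_evalA2 (board : List String) (nN mN : Nat) (xi yj e : Nat)
    (st : List (Int × Int) × List (List Int))
    (hs : pvSlide board nN mN 0 (-1) (((nN : Int) + (mN : Int)).toNat + 1)
      (xi : Int) ((yj : Int) - 1) = ((xi : Int), (e : Int) - 1)) :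
    pvStepA board nN mN xi yj st 2 = pvStepA' board nN mN xi yj st ((xi : Int), (e : Int)) := by
  have h1 : PySem.List.pyGetD [(1 : Int), -1, 0, 0] 2 0 = 0 := by decide
  have h2 : PySem.List.pyGetD [(0 : Int), 0, -1, 1] 2 0 = -1 := by decide
  unfold pvStepA pvStepA'
  simp only [h1, h2, add_zero, ← sub_eq_add_neg, hs, sub_zero, sub_neg_eq_add,
    sub_add_cancel]

theorem pv_evalA3 (board : List String) (nN mN : Nat) (xi yj e : Nat)
    (st : List (Int × Int) × List (List Int))
    (hs : pvSlide board nN mN 0 1 (((nN : Int) + (mN : Int)).toNat + 1)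
      (xi : Int) ((yj : Int) + 1) = ((xi : Int), (e : Int) + 1)) :
    pvStepA board nN mN xi yj st 3 = pvStepA' board nN mN xi yj st ((xi : Int), (e : Int)) := by
  have h1 : PySem.List.pyGetD [(1 : Int), -1, 0, 0] 3 0 = 0 := by decide
  have h2 : PySem.List.pyGetD [(0 : Int), 0, -1, 1] 3 0 = 1 := by decide
  unfold pvStepA pvStepA'
  simp only [h1, h2, add_zero, hs, add_sub_cancel_right, sub_zero]

theorem pv_step_sim (board : List String) (nN mN : Nat) (v : List (List Int))
    (d : PySem.Dict (Int × Int) Int) (qA qB : List (Int × Int)) (h : Nat)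
    (xi yj ai bj : Nat)
    (hRel : pvRel nN mN v d) (hQ : pvQInv board nN mN v qA)
    (hq : qA = qB.drop h) (hh : h ≤ qB.length)
    (hxi : xi < nN) (hyj : yj < mN) (hnz : pvVGet v xi yj ≠ 0)
    (ha : ai < nN) (hb : bj < mN) (hcd : pvCellN board ai bj ≠ 'D') :
    (pvStepA' board nN mN xi yj (qA, v) ((ai : Int), (bj : Int))).1
      = (pvStepB xi yj (qB, d) ((ai : Int), (bj : Int))).1.drop h ∧
    h ≤ (pvStepB xi yj (qB, d) ((ai : Int), (bj : Int))).1.length ∧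
    pvRel nN mN (pvStepA' board nN mN xi yj (qA, v) ((ai : Int), (bj : Int))).2
      (pvStepB xi yj (qB, d) ((ai : Int), (bj : Int))).2 ∧
    pvQInv board nN mN (pvStepA' board nN mN xi yj (qA, v) ((ai : Int), (bj : Int))).2
      (pvStepA' board nN mN xi yj (qA, v) ((ai : Int), (bj : Int))).1 ∧
    pvVGet (pvStepA' board nN mN xi yj (qA, v) ((ai : Int), (bj : Int))).2 xi yj
      = pvVGet v xi yj := by
  obtain ⟨hvlen, hvrows, hcells⟩ := hRel
  have hwle : 0 < pvVGet v xi yj :=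
    lt_of_le_of_ne (hcells xi yj hxi hyj).1 (Ne.symm hnz)
  have hcont : d.contains ((ai : Int), (bj : Int)) = true ↔ pvVGet v ai bj ≠ 0 := by
    rw [PySem.Dict.contains_eq_isSome_get?, Option.isSome_iff_ne_none]
    constructor
    · intro h hcon
      exact h (((hcells ai bj ha hb).2.1).mp hcon)
    · intro h hcon
      exact h (((hcells ai bj ha hb).2.1).mpr hcon)
  have hgd : d.getD ((xi : Int), (yj : Int)) 0 = pvVGet v xi yj - 1 := by
    rw [PySem.Dict.getD_eq_get?_getD, (hcells xi yj hxi hyj).2.2 hnz]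
    rfl
  simp only [pvStepA', pvStepB]
  by_cases h0 : pvVGet v ai bj = 0
  · rw [if_pos (⟨Int.natCast_nonneg ai, by exact_mod_cast ha, Int.natCast_nonneg bj,
      by exact_mod_cast hb, by rw [pv_cellA_eq _ _ _ (Int.natCast_nonneg ai)
        (Int.natCast_nonneg bj), Int.toNat_natCast, Int.toNat_natCast]; exact hcd, h0⟩ :
      0 ≤ ((ai : Int)) ∧ ((ai : Int)) < (nN : Int) ∧ 0 ≤ ((bj : Int)) ∧
        ((bj : Int)) < (mN : Int) ∧ pvCellA board ai bj ≠ 'D' ∧ pvVGet v ai bj = 0)]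
    rw [if_neg (fun hc => (hcont.mp hc) h0)]
    have hget := pv_vget_vset mN v hvrows ai bj
    have hwf := pv_vset_wf mN v hvrows ai bj (by omega) (pvVGet v xi yj + 1)
    refine ⟨by rw [List.drop_append_of_le_length hh, ← hq],
            by simp only [List.length_append]; omega, ⟨?_, ?_, ?_⟩, ?_, ?_⟩
    · rw [hwf.1]; exact hvlen
    · exact hwf.2
    · intro i j hi hj
      rw [hget i j (by omega) hb]
      by_cases hij : i = ai ∧ j = bj
      · obtain ⟨rfl, rfl⟩ := hij
        rw [if_pos ⟨rfl, rfl⟩]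
        refine ⟨by omega, ?_, ?_⟩
        · rw [PySem.Dict.get?_insert_self]
          constructor
          · intro h; omega
          · intro h; exact absurd h (by simp)
        · intro _
          rw [PySem.Dict.get?_insert_self, hgd]
          congr 1
          ring
      · rw [if_neg hij]
        have hkne : ((i : Int), (j : Int)) ≠ ((ai : Int), (bj : Int)) := by
          intro hc
          simp only [Prod.mk.injEq, Int.natCast_inj] at hc
          exact hij hc
        rw [PySem.Dict.get?_insert, if_neg hkne]
        exact hcells i j hi hj
    · intro p hp
      rcases List.mem_append.mp hp with hold | hnew
      · obtain ⟨i, j, rfl, hi, hj, hc, hv⟩ := hQ _ hold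
        refine ⟨i, j, rfl, hi, hj, hc, ?_⟩
        rw [hget i j (by omega) hb]
        split
        · omega
        · exact hv
      · rw [List.mem_singleton] at hnew
        subst hnew
        refine ⟨ai, bj, rfl, ha, hb, hcd, ?_⟩
        rw [hget ai bj (by omega) hb, if_pos ⟨rfl, rfl⟩]
        omega
    · rw [hget xi yj (by omega) hb, if_neg (by
        rintro ⟨rfl, rfl⟩
        exact hnz h0)]
  · rw [if_neg (by
      rintro ⟨-, -, -, -, -, hc⟩
      exact h0 hc)]
    rw [if_pos (hcont.mpr h0)]
    exact ⟨hq, hh, ⟨hvlen, hvrows, hcells⟩, hQ, rfl⟩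

theorem pv_range4 : PySem.List.pyRange 0 4 1 = [0, 1, 2, 3] := by decide

theorem pv_bfs_sim (board : List String) (nN mN : Nat)
    (hor vert : List (List Int × List Int)) (goal : Option (Int × Int)) (gx gy : Int)
    (hgoal : ∀ (xi yj : Nat), xi < nN → yj < mN →
      (((xi : Int) = gx ∧ (yj : Int) = gy) ↔ goal = some ((xi : Int), (yj : Int))))
    (hdown : ∀ (xi yj : Nat), xi < nN → yj < mN → pvCellN board xi yj ≠ 'D' →
      ∃ e : Nat, e < nN ∧ pvCellN board e yj ≠ 'D' ∧
        pvSlide board nN mN 1 0 (((nN : Int) + (mN : Int)).toNat + 1)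
          ((xi : Int) + 1) (yj : Int) = ((e : Int) + 1, (yj : Int)) ∧
        PySem.List.pyGetD (PySem.List.pyGetD vert (yj : Int) ([], [])).2 (xi : Int) 0
          = (e : Int))
    (hup : ∀ (xi yj : Nat), xi < nN → yj < mN → pvCellN board xi yj ≠ 'D' →
      ∃ e : Nat, e < nN ∧ pvCellN board e yj ≠ 'D' ∧
        pvSlide board nN mN (-1) 0 (((nN : Int) + (mN : Int)).toNat + 1)
          ((xi : Int) - 1) (yj : Int) = ((e : Int) - 1, (yj : Int)) ∧
        PySem.List.pyGetD (PySem.List.pyGetD vert (yj : Int) ([], [])).1 (xi : Int) 0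
          = (e : Int))
    (hleft : ∀ (xi yj : Nat), xi < nN → yj < mN → pvCellN board xi yj ≠ 'D' →
      ∃ e : Nat, e < mN ∧ pvCellN board xi e ≠ 'D' ∧
        pvSlide board nN mN 0 (-1) (((nN : Int) + (mN : Int)).toNat + 1)
          (xi : Int) ((yj : Int) - 1) = ((xi : Int), (e : Int) - 1) ∧
        PySem.List.pyGetD (PySem.List.pyGetD hor (xi : Int) ([], [])).1 (yj : Int) 0
          = (e : Int))
    (hright : ∀ (xi yj : Nat), xi < nN → yj < mN → pvCellN board xi yj ≠ 'D' →
      ∃ e : Nat, e < mN ∧ pvCellN board xi e ≠ 'D' ∧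
        pvSlide board nN mN 0 1 (((nN : Int) + (mN : Int)).toNat + 1)
          (xi : Int) ((yj : Int) + 1) = ((xi : Int), (e : Int) + 1) ∧
        PySem.List.pyGetD (PySem.List.pyGetD hor (xi : Int) ([], [])).2 (yj : Int) 0
          = (e : Int)) :
    ∀ (fuel : Nat) (Q : List (Int × Int)) (head : Nat) (v : List (List Int))
      (d : PySem.Dict (Int × Int) Int),
      pvRel nN mN v d → pvQInv board nN mN v (Q.drop head) → head ≤ Q.length →
      pvBfsA board nN mN gx gy fuel (Q.drop head) v = pvBfsB hor vert goal fuel Q head d := by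
  intro fuel
  induction fuel with
  | zero => intro Q head v d _ _ _; rfl
  | succ f ih =>
    intro Q head v d hRel hQ hhead
    cases hQh : Q[head]? with
    | none =>
      have hge : Q.length ≤ head := by
        rwa [List.getElem?_eq_none_iff] at hQh
      rw [List.drop_of_length_le hge]
      simp only [pvBfsA, pvBfsB, hQh]
    | some p =>
      obtain ⟨x, y⟩ := p
      have hlt : head < Q.length := by
        rcases List.getElem?_eq_some_iff.mp hQh with ⟨hl, -⟩
        exact hl
      have hQhd : Q[head] = (x, y) := by
        rcases List.getElem?_eq_some_iff.mp hQh with ⟨hl2, he2⟩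
        exact he2
      have hdrop : Q.drop head = (x, y) :: Q.drop (head + 1) := by
        rw [List.drop_eq_getElem_cons hlt, hQhd]
      obtain ⟨xi, yj, hp, hxi, hyj, hcell, hnz⟩ := hQ (x, y) (hdrop ▸ List.mem_cons_self)
      have hx : x = (xi : Int) := congrArg Prod.fst hp
      have hy : y = (yj : Int) := congrArg Prod.snd hp
      subst hx
      subst hy
      rw [hdrop]
      simp only [pvBfsA, pvBfsB, hQh]
      have hQ1 : pvQInv board nN mN v (Q.drop (head + 1)) := by
        intro p hp
        exact hQ p (hdrop ▸ List.mem_cons_of_mem _ hp)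
      by_cases hg : ((xi : Int)) = gx ∧ ((yj : Int)) = gy
      · rw [if_pos hg, if_pos ((hgoal xi yj hxi hyj).mp hg)]
        obtain ⟨hg1, hg2⟩ := hg
        rw [← hg1, ← hg2]
        have hsome := (hRel.2.2 xi yj hxi hyj).2.2 hnz
        rw [PySem.Dict.getD_eq_get?_getD, hsome]
        rfl
      · rw [if_neg hg, if_neg (fun hc => hg ((hgoal xi yj hxi hyj).mpr hc))]
        obtain ⟨e0, he0n, he0c, he0s, he0t⟩ := hdown xi yj hxi hyj hcell
        obtain ⟨e1, he1n, he1c, he1s, he1t⟩ := hup xi yj hxi hyj hcell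
        obtain ⟨e2, he2n, he2c, he2s, he2t⟩ := hleft xi yj hxi hyj hcell
        obtain ⟨e3, he3n, he3c, he3s, he3t⟩ := hright xi yj hxi hyj hcell
        rw [pv_range4, he0t, he1t, he2t, he3t]
        simp only [List.foldl_cons, List.foldl_nil]
        rw [pv_evalA0 board nN mN xi yj e0 _ he0s]
        have s0 := pv_step_sim board nN mN v d (Q.drop (head + 1)) Q (head + 1) xi yj e0 yj
          ⟨hRel.1, hRel.2.1, hRel.2.2⟩ hQ1 rfl (by omega)
          hxi hyj hnz he0n hyj he0c
        cases hA0 : pvStepA' board nN mN xi yj (Q.drop (head + 1), v) ((e0 : Int), (yj : Int)) with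
        | mk q1 v1 =>
        cases hB0 : pvStepB xi yj (Q, d) ((e0 : Int), (yj : Int)) with
        | mk Q1 d1 =>
        rw [hA0, hB0] at s0
        obtain ⟨hqe0, hlen0, hrel0, hqi0, hw0⟩ := s0
        simp only at hqe0 hlen0 hrel0 hqi0 hw0
        subst hqe0
        rw [pv_evalA1 board nN mN xi yj e1 _ he1s]
        have s1 := pv_step_sim board nN mN v1 d1 (Q1.drop (head + 1)) Q1 (head + 1) xi yj e1 yj
          hrel0 hqi0 rfl hlen0 hxi hyj (by rw [hw0]; exact hnz) he1n hyj he1c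
        rw [hw0] at s1
        cases hA1 : pvStepA' board nN mN xi yj (Q1.drop (head + 1), v1) ((e1 : Int), (yj : Int)) with
        | mk q2 v2 =>
        cases hB1 : pvStepB xi yj (Q1, d1) ((e1 : Int), (yj : Int)) with
        | mk Q2 d2 =>
        rw [hA1, hB1] at s1
        obtain ⟨hqe1, hlen1, hrel1, hqi1, hw1⟩ := s1
        simp only at hqe1 hlen1 hrel1 hqi1 hw1
        subst hqe1
        rw [pv_evalA2 board nN mN xi yj e2 _ he2s]
        have s2 := pv_step_sim board nN mN v2 d2 (Q2.drop (head + 1)) Q2 (head + 1) xi yj xi e2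
          hrel1 hqi1 rfl hlen1 hxi hyj (by rw [hw1]; exact hnz) hxi he2n he2c
        rw [hw1] at s2
        cases hA2 : pvStepA' board nN mN xi yj (Q2.drop (head + 1), v2) ((xi : Int), (e2 : Int)) with
        | mk q3 v3 =>
        cases hB2 : pvStepB xi yj (Q2, d2) ((xi : Int), (e2 : Int)) with
        | mk Q3 d3 =>
        rw [hA2, hB2] at s2
        obtain ⟨hqe2, hlen2, hrel2, hqi2, hw2⟩ := s2
        simp only at hqe2 hlen2 hrel2 hqi2 hw2
        subst hqe2
        rw [pv_evalA3 board nN mN xi yj e3 _ he3s]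
        have s3 := pv_step_sim board nN mN v3 d3 (Q3.drop (head + 1)) Q3 (head + 1) xi yj xi e3
          hrel2 hqi2 rfl hlen2 hxi hyj (by rw [hw2]; exact hnz) hxi he3n he3c
        cases hA3 : pvStepA' board nN mN xi yj (Q3.drop (head + 1), v3) ((xi : Int), (e3 : Int)) with
        | mk q4 v4 =>
        cases hB3 : pvStepB xi yj (Q3, d3) ((xi : Int), (e3 : Int)) with
        | mk Q4 d4 =>
        rw [hA3, hB3] at s3
        obtain ⟨hqe3, hlen3, hrel3, hqi3, hw3⟩ := s3
        simp only at hqe3 hlen3 hrel3 hqi3 hw3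
        subst hqe3
        exact ih Q4 (head + 1) v4 d4 hrel3 hqi3 hlen3

theorem pv_split3 {α β γ δ : Type} (l : List δ) (f1 : α → δ → α) (f2 : β → δ → β)
    (f3 : γ → δ → γ) (a : α) (b : β) (c : γ) :
    l.foldl (fun st e => (f1 st.1 e, f2 st.2.1 e, f3 st.2.2 e)) (a, b, c)
      = (l.foldl f1 a, l.foldl f2 b, l.foldl f3 c) := by
  induction l generalizing a b c with
  | nil => rfl
  | cons x t ih => simp only [List.foldl_cons]; exact ih _ _ _

theorem pv_scan_split (board : List String) (n m : Int) :
    pvScanA board n m =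
      ((PySem.List.pyRange 0 n 1).foldl (fun q i =>
          (PySem.List.pyRange 0 m 1).foldl (fun q j =>
            if pvCellA board i j = 'R' then q ++ [(i, j)] else q) q) [],
       (PySem.List.pyRange 0 n 1).foldl (fun v i =>
          (PySem.List.pyRange 0 m 1).foldl (fun v j =>
            if pvCellA board i j = 'R' then pvVSet v i j 1 else v) v)
         (List.replicate n.toNat (List.replicate m.toNat 0)),
       (PySem.List.pyRange 0 n 1).foldl (fun g i =>
          (PySem.List.pyRange 0 m 1).foldl (fun g j =>
            if pvCellA board i j = 'G' then some (i, j) else g) g) none) := by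
  unfold pvScanA
  have hfun : ∀ i : Int, (fun (st : List (Int × Int) × List (List Int) × Option (Int × Int)) j =>
      let st' := if pvCellA board i j = 'R'
        then (st.1 ++ [(i, j)], pvVSet st.2.1 i j 1, st.2.2) else st
      if pvCellA board i j = 'G' then (st'.1, st'.2.1, some (i, j)) else st')
    = (fun st j =>
      ((if pvCellA board i j = 'R' then st.1 ++ [(i, j)] else st.1),
       (if pvCellA board i j = 'R' then pvVSet st.2.1 i j 1 else st.2.1),
       (if pvCellA board i j = 'G' then some (i, j) else st.2.2))) := by
    intro i
    funext st j
    by_cases hR : pvCellA board i j = 'R' <;> by_cases hG : pvCellA board i j = 'G' <;>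
      simp [hR, hG]
  have hout : (fun (st : List (Int × Int) × List (List Int) × Option (Int × Int)) (i : Int) =>
      (PySem.List.pyRange 0 m 1).foldl (fun st j =>
        let st' := if pvCellA board i j = 'R'
          then (st.1 ++ [(i, j)], pvVSet st.2.1 i j 1, st.2.2) else st
        if pvCellA board i j = 'G' then (st'.1, st'.2.1, some (i, j)) else st') st)
    = (fun st i =>
      ((PySem.List.pyRange 0 m 1).foldl (fun q j =>
         if pvCellA board i j = 'R' then q ++ [(i, j)] else q) st.1,
       (PySem.List.pyRange 0 m 1).foldl (fun v j =>
         if pvCellA board i j = 'R' then pvVSet v i j 1 else v) st.2.1,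
       (PySem.List.pyRange 0 m 1).foldl (fun g j =>
         if pvCellA board i j = 'G' then some (i, j) else g) st.2.2)) := by
    funext st i
    obtain ⟨a, b, c⟩ := st
    rw [hfun i]
    exact pv_split3 (PySem.List.pyRange 0 m 1)
      (fun q j => if pvCellA board i j = 'R' then q ++ [(i, j)] else q)
      (fun v j => if pvCellA board i j = 'R' then pvVSet v i j 1 else v)
      (fun g j => if pvCellA board i j = 'G' then some (i, j) else g) a b c
  rw [hout]
  exact pv_split3 (PySem.List.pyRange 0 n 1)
    (fun q i => (PySem.List.pyRange 0 m 1).foldl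
      (fun q j => if pvCellA board i j = 'R' then q ++ [(i, j)] else q) q)
    (fun v i => (PySem.List.pyRange 0 m 1).foldl
      (fun v j => if pvCellA board i j = 'R' then pvVSet v i j 1 else v) v)
    (fun g i => (PySem.List.pyRange 0 m 1).foldl
      (fun g j => if pvCellA board i j = 'G' then some (i, j) else g) g)
    [] (List.replicate n.toNat (List.replicate m.toNat 0)) none

theorem pv_vget_init (nN mN a b : Nat) :
    pvVGet (List.replicate nN (List.replicate mN (0 : Int))) a b = 0 := by
  rw [pv_vget_natCast]
  have h1 : (List.replicate nN (List.replicate mN (0 : Int))).getD a []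
      = if a < nN then List.replicate mN (0 : Int) else [] := by
    rw [List.getD_eq_getElem?_getD, List.getElem?_replicate]
    split <;> rfl
  rw [h1]
  split
  · rw [List.getD_eq_getElem?_getD, List.getElem?_replicate]
    split <;> rfl
  · rfl

theorem pv_row_fold (board : List String) (nN mN : Nat) (i : Nat) (hi : i < nN) :
    ∀ (J : Nat), J ≤ mN → ∀ (v : List (List Int)), v.length = nN →
    (∀ r ∈ v, r.length = mN) →
    ((PySem.List.pyRange 0 (J : Int) 1).foldl
        (fun v j => if pvCellA board i j = 'R' then pvVSet v i j 1 else v) v).length = nN ∧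
    (∀ r ∈ (PySem.List.pyRange 0 (J : Int) 1).foldl
        (fun v j => if pvCellA board i j = 'R' then pvVSet v i j 1 else v) v,
      r.length = mN) ∧
    ∀ a b : Nat, a < nN → b < mN →
      pvVGet ((PySem.List.pyRange 0 (J : Int) 1).foldl
        (fun v j => if pvCellA board i j = 'R' then pvVSet v i j 1 else v) v) a b
      = if a = i ∧ b < J ∧ pvCellN board a b = 'R' then 1 else pvVGet v a b := by
  intro J
  induction J with
  | zero =>
    intro _ v hvl hvr
    simp only [show (((0 : Nat)) : Int) = 0 from rfl,
      PySem.List.pyRange_one_eq_nil (le_refl (0 : Int)), List.foldl_nil]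
    refine ⟨hvl, hvr, ?_⟩
    intro a b ha hb
    rw [if_neg (by rintro ⟨-, h, -⟩; omega)]
  | succ J ih =>
    intro hJ v hvl hvr
    rw [show ((J + 1 : Nat) : Int) = (J : Int) + 1 by push_cast; ring,
      PySem.List.pyRange_one_succ_right (Int.natCast_nonneg J),
      List.foldl_append]
    obtain ⟨ihl, ihr, ihv⟩ := ih (by omega) v hvl hvr
    set v1 := (PySem.List.pyRange 0 (J : Int) 1).foldl
      (fun v j => if pvCellA board i j = 'R' then pvVSet v i j 1 else v) v with hv1
    simp only [List.foldl_cons, List.foldl_nil]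
    have hbridge : pvCellA board i J = pvCellN board i J := by
      rw [pv_cellA_eq _ _ _ (Int.natCast_nonneg i) (Int.natCast_nonneg J),
        Int.toNat_natCast, Int.toNat_natCast]
    by_cases hR : pvCellN board i J = 'R'
    · rw [if_pos (by rw [hbridge]; exact hR)]
      have hwf := pv_vset_wf mN v1 ihr i J (by omega) 1
      refine ⟨by rw [hwf.1]; exact ihl, hwf.2, ?_⟩
      intro a b ha hb
      rw [pv_vget_vset mN v1 ihr i J a b (by omega) (by omega) 1]
      by_cases hab : a = i ∧ b = J
      · obtain ⟨rfl, rfl⟩ := hab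
        rw [if_pos ⟨rfl, rfl⟩, if_pos ⟨rfl, by omega, hR⟩]
      · rw [if_neg hab, ihv a b ha hb]
        by_cases hc : a = i ∧ b < J ∧ pvCellN board a b = 'R'
        · rw [if_pos hc, if_pos ⟨hc.1, by omega, hc.2.2⟩]
        · rw [if_neg hc, if_neg (by
            rintro ⟨rfl, hbJ, hcell⟩
            exact hc ⟨rfl, by
              rcases Nat.lt_succ_iff_lt_or_eq.mp hbJ with h | h
              · exact h
              · exact absurd ⟨rfl, h⟩ hab, hcell⟩)]
    · rw [if_neg (by rw [hbridge]; exact hR)]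
      refine ⟨ihl, ihr, ?_⟩
      intro a b ha hb
      rw [ihv a b ha hb]
      by_cases hc : a = i ∧ b < J ∧ pvCellN board a b = 'R'
      · rw [if_pos hc, if_pos ⟨hc.1, by omega, hc.2.2⟩]
      · rw [if_neg hc, if_neg (by
          rintro ⟨rfl, hbJ, hcell⟩
          refine hc ⟨rfl, ?_, hcell⟩
          rcases Nat.lt_succ_iff_lt_or_eq.mp hbJ with h | h
          · exact h
          · subst h; exact absurd hcell hR)]


theorem pv_scanv_fold (board : List String) (nN mN : Nat) :
    ∀ (I : Nat), I ≤ nN →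
    ((PySem.List.pyRange 0 (I : Int) 1).foldl (fun v i =>
        (PySem.List.pyRange 0 (mN : Int) 1).foldl
          (fun v j => if pvCellA board i j = 'R' then pvVSet v i j 1 else v) v)
      (List.replicate nN (List.replicate mN 0))).length = nN ∧
    (∀ r ∈ (PySem.List.pyRange 0 (I : Int) 1).foldl (fun v i =>
        (PySem.List.pyRange 0 (mN : Int) 1).foldl
          (fun v j => if pvCellA board i j = 'R' then pvVSet v i j 1 else v) v)
      (List.replicate nN (List.replicate mN 0)), r.length = mN) ∧
    ∀ a b : Nat, a < nN → b < mN →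
      pvVGet ((PySem.List.pyRange 0 (I : Int) 1).foldl (fun v i =>
        (PySem.List.pyRange 0 (mN : Int) 1).foldl
          (fun v j => if pvCellA board i j = 'R' then pvVSet v i j 1 else v) v)
        (List.replicate nN (List.replicate mN 0))) a b
      = if a < I ∧ pvCellN board a b = 'R' then 1 else 0 := by
  intro I
  induction I with
  | zero =>
    intro _
    simp only [show (((0 : Nat)) : Int) = 0 from rfl,
      PySem.List.pyRange_one_eq_nil (le_refl (0 : Int)), List.foldl_nil]
    refine ⟨by simp, by
      intro r hr
      exact (List.eq_of_mem_replicate hr) ▸ List.length_replicate, ?_⟩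
    intro a b ha hb
    rw [if_neg (by rintro ⟨h, -⟩; omega), pv_vget_init]
  | succ I ih =>
    intro hI
    obtain ⟨ihl, ihr, ihv⟩ := ih (by omega)
    rw [show ((I + 1 : Nat) : Int) = (I : Int) + 1 by push_cast; ring,
      PySem.List.pyRange_one_succ_right (Int.natCast_nonneg I), List.foldl_append]
    simp only [List.foldl_cons, List.foldl_nil]
    obtain ⟨hl2, hr2, hv2⟩ := pv_row_fold board nN mN I (by omega) mN (le_refl mN) _ ihl ihr
    refine ⟨hl2, hr2, ?_⟩
    intro a b ha hb
    rw [hv2 a b ha hb, ihv a b ha hb]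
    by_cases hR : pvCellN board a b = 'R'
    · by_cases haI : a = I
      · subst haI
        rw [if_pos ⟨rfl, hb, hR⟩, if_pos ⟨by omega, hR⟩]
      · by_cases haI2 : a < I
        · rw [if_neg (by tauto), if_pos ⟨haI2, hR⟩, if_pos ⟨by omega, hR⟩]
        · rw [if_neg (by tauto), if_neg (by tauto), if_neg (by
            rintro ⟨h, -⟩
            omega)]
    · rw [if_neg (by tauto), if_neg (by tauto), if_neg (by tauto)]

theorem pv_dir_up (board : List String) (nN mN : Nat)
    (vert : List (List Int × List Int)) (colS : List Char) (xi yj : Nat)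
    (hxi : xi < nN) (hyj : yj < mN)
    (hvert : PySem.List.pyGetD vert (yj : Int) ([], []) = pvDests colS)
    (hlen : colS.length = nN)
    (hcell : ∀ k : Nat, k < nN → pvCellOf colS k = pvCellN board k yj)
    (hD : pvCellN board xi yj ≠ 'D') :
    ∃ e : Nat, e < nN ∧ pvCellN board e yj ≠ 'D' ∧
      pvSlide board nN mN (-1) 0 (((nN : Int) + (mN : Int)).toNat + 1)
        ((xi : Int) - 1) (yj : Int) = ((e : Int) - 1, (yj : Int)) ∧
      PySem.List.pyGetD (PySem.List.pyGetD vert (yj : Int) ([], [])).1 (xi : Int) 0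
        = (e : Int) := by
  have hseg := pv_seg_le (fun k => pvCellN board k yj) xi
  refine ⟨pvSeg (fun k => pvCellN board k yj) xi, by omega,
    pv_seg_ne (fun k => pvCellN board k yj) xi hD, ?_, ?_⟩
  · rw [pv_slide_vert board nN mN (-1) (yj : Int) (Int.natCast_nonneg yj)
      (by exact_mod_cast hyj), show ((yj : Int)).toNat = yj from Int.toNat_natCast yj,
      pv_slide1_neg _ (nN : Int) xi _ (by exact_mod_cast hxi) (by
        have h9 : ((nN : Int) + (mN : Int)).toNat = nN + mN := by
          rw [show (nN : Int) + (mN : Int) = ((nN + mN : Nat) : Int) by push_cast; ring,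
            Int.toNat_natCast]
        omega)]
  · rw [hvert]
    obtain ⟨hl1, hl2, hj⟩ := pv_dests_struct colS.length colS le_rfl
    have hcd : pvCellOf colS xi ≠ 'D' := by rw [hcell xi hxi]; exact hD
    obtain ⟨hlft, -⟩ := hj xi (by omega) hcd
    rw [show PySem.List.pyGetD (pvDests colS).1 (xi : Int) 0
        = (pvDests colS).1.getD xi 0 from by
      rw [PySem.List.pyGetD_natCast], hlft]
    congr 1
    apply pv_seg_congr
    intro k hk
    exact hcell k (by omega)

theorem pv_dir_down (board : List String) (nN mN : Nat)
    (vert : List (List Int × List Int)) (colS : List Char) (xi yj : Nat)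
    (hxi : xi < nN) (hyj : yj < mN)
    (hvert : PySem.List.pyGetD vert (yj : Int) ([], []) = pvDests colS)
    (hlen : colS.length = nN)
    (hcell : ∀ k : Nat, k < nN → pvCellOf colS k = pvCellN board k yj)
    (hD : pvCellN board xi yj ≠ 'D') :
    ∃ e : Nat, e < nN ∧ pvCellN board e yj ≠ 'D' ∧
      pvSlide board nN mN 1 0 (((nN : Int) + (mN : Int)).toNat + 1)
        ((xi : Int) + 1) (yj : Int) = ((e : Int) + 1, (yj : Int)) ∧
      PySem.List.pyGetD (PySem.List.pyGetD vert (yj : Int) ([], [])).2 (xi : Int) 0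
        = (e : Int) := by
  have hseg := pv_segE_bounds (fun k => pvCellN board k yj) (nN - 1 - xi) xi
  refine ⟨pvSegE (fun k => pvCellN board k yj) (nN - 1 - xi) xi, by omega,
    pv_segE_ne (fun k => pvCellN board k yj) (nN - 1 - xi) xi hD, ?_, ?_⟩
  · rw [pv_slide_vert board nN mN 1 (yj : Int) (Int.natCast_nonneg yj)
      (by exact_mod_cast hyj), show ((yj : Int)).toNat = yj from Int.toNat_natCast yj,
      pv_slide1_pos _ (nN : Int) (nN - 1 - xi) xi _ (by push_cast; omega) (by
        have h9 : ((nN : Int) + (mN : Int)).toNat = nN + mN := by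
          rw [show (nN : Int) + (mN : Int) = ((nN + mN : Nat) : Int) by push_cast; ring,
            Int.toNat_natCast]
        omega)]
  · rw [hvert]
    obtain ⟨hl1, hl2, hj⟩ := pv_dests_struct colS.length colS le_rfl
    have hcd : pvCellOf colS xi ≠ 'D' := by rw [hcell xi hxi]; exact hD
    obtain ⟨-, hrt⟩ := hj xi (by omega) hcd
    rw [show PySem.List.pyGetD (pvDests colS).2 (xi : Int) 0
        = (pvDests colS).2.getD xi 0 from by
      rw [PySem.List.pyGetD_natCast], hrt]
    rw [hlen]
    congr 1
    apply pv_segE_congr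
    intro k hk1 hk2
    exact hcell k (by omega)

theorem pv_dir_left (board : List String) (nN mN : Nat)
    (hor : List (List Int × List Int)) (rowS : List Char) (xi yj : Nat)
    (hxi : xi < nN) (hyj : yj < mN)
    (hhor : PySem.List.pyGetD hor (xi : Int) ([], []) = pvDests rowS)
    (hlen : rowS.length = mN)
    (hcell : ∀ k : Nat, k < mN → pvCellOf rowS k = pvCellN board xi k)
    (hD : pvCellN board xi yj ≠ 'D') :
    ∃ e : Nat, e < mN ∧ pvCellN board xi e ≠ 'D' ∧
      pvSlide board nN mN 0 (-1) (((nN : Int) + (mN : Int)).toNat + 1)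
        (xi : Int) ((yj : Int) - 1) = ((xi : Int), (e : Int) - 1) ∧
      PySem.List.pyGetD (PySem.List.pyGetD hor (xi : Int) ([], [])).1 (yj : Int) 0
        = (e : Int) := by
  have hseg := pv_seg_le (fun k => pvCellN board xi k) yj
  refine ⟨pvSeg (fun k => pvCellN board xi k) yj, by omega,
    pv_seg_ne (fun k => pvCellN board xi k) yj hD, ?_, ?_⟩
  · rw [pv_slide_horiz board nN mN (-1) (xi : Int) (Int.natCast_nonneg xi)
      (by exact_mod_cast hxi), show ((xi : Int)).toNat = xi from Int.toNat_natCast xi,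
      pv_slide1_neg _ (mN : Int) yj _ (by exact_mod_cast hyj) (by
        have h9 : ((nN : Int) + (mN : Int)).toNat = nN + mN := by
          rw [show (nN : Int) + (mN : Int) = ((nN + mN : Nat) : Int) by push_cast; ring,
            Int.toNat_natCast]
        omega)]
  · rw [hhor]
    obtain ⟨hl1, hl2, hj⟩ := pv_dests_struct rowS.length rowS le_rfl
    have hcd : pvCellOf rowS yj ≠ 'D' := by rw [hcell yj hyj]; exact hD
    obtain ⟨hlft, -⟩ := hj yj (by omega) hcd
    rw [show PySem.List.pyGetD (pvDests rowS).1 (yj : Int) 0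
        = (pvDests rowS).1.getD yj 0 from by
      rw [PySem.List.pyGetD_natCast], hlft]
    congr 1
    apply pv_seg_congr
    intro k hk
    exact hcell k (by omega)

theorem pv_dir_right (board : List String) (nN mN : Nat)
    (hor : List (List Int × List Int)) (rowS : List Char) (xi yj : Nat)
    (hxi : xi < nN) (hyj : yj < mN)
    (hhor : PySem.List.pyGetD hor (xi : Int) ([], []) = pvDests rowS)
    (hlen : rowS.length = mN)
    (hcell : ∀ k : Nat, k < mN → pvCellOf rowS k = pvCellN board xi k)
    (hD : pvCellN board xi yj ≠ 'D') :
    ∃ e : Nat, e < mN ∧ pvCellN board xi e ≠ 'D' ∧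
      pvSlide board nN mN 0 1 (((nN : Int) + (mN : Int)).toNat + 1)
        (xi : Int) ((yj : Int) + 1) = ((xi : Int), (e : Int) + 1) ∧
      PySem.List.pyGetD (PySem.List.pyGetD hor (xi : Int) ([], [])).2 (yj : Int) 0
        = (e : Int) := by
  have hseg := pv_segE_bounds (fun k => pvCellN board xi k) (mN - 1 - yj) yj
  refine ⟨pvSegE (fun k => pvCellN board xi k) (mN - 1 - yj) yj, by omega,
    pv_segE_ne (fun k => pvCellN board xi k) (mN - 1 - yj) yj hD, ?_, ?_⟩
  · rw [pv_slide_horiz board nN mN 1 (xi : Int) (Int.natCast_nonneg xi)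
      (by exact_mod_cast hxi), show ((xi : Int)).toNat = xi from Int.toNat_natCast xi,
      pv_slide1_pos _ (mN : Int) (mN - 1 - yj) yj _ (by push_cast; omega) (by
        have h9 : ((nN : Int) + (mN : Int)).toNat = nN + mN := by
          rw [show (nN : Int) + (mN : Int) = ((nN + mN : Nat) : Int) by push_cast; ring,
            Int.toNat_natCast]
        omega)]
  · rw [hhor]
    obtain ⟨hl1, hl2, hj⟩ := pv_dests_struct rowS.length rowS le_rfl
    have hcd : pvCellOf rowS yj ≠ 'D' := by rw [hcell yj hyj]; exact hD
    obtain ⟨-, hrt⟩ := hj yj (by omega) hcd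
    rw [show PySem.List.pyGetD (pvDests rowS).2 (yj : Int) 0
        = (pvDests rowS).2.getD yj 0 from by
      rw [PySem.List.pyGetD_natCast], hrt]
    rw [hlen]
    congr 1
    apply pv_segE_congr
    intro k hk1 hk2
    exact hcell k (by omega)

theorem pv_dist_get? (l : List (Int × Int)) :
    ∀ (d : PySem.Dict (Int × Int) Int) (k : Int × Int),
    (l.foldl (fun d s => d.insert s 0) d).get? k = if k ∈ l then some 0 else d.get? k := by
  induction l with
  | nil => intro d k; simp
  | cons s t ih =>
    intro d k
    rw [List.foldl_cons, ih]
    by_cases hk : k ∈ t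
    · rw [if_pos hk, if_pos (List.mem_cons_of_mem _ hk)]
    · rw [if_neg hk, PySem.Dict.get?_insert]
      by_cases hks : k = s
      · rw [if_pos hks, if_pos (by simp [hks])]
      · rw [if_neg hks, if_neg (by simp [hks, hk])]

theorem pv_beq_decide (c : Char) : (c == 'R') = decide (c = 'R') := by
  by_cases h : c = 'R' <;> simp [h]

theorem pv_flatMap_congr {α β : Type} (l : List α) (f g : α → List β)
    (h : ∀ x ∈ l, f x = g x) : l.flatMap f = l.flatMap g := by
  induction l with
  | nil => rfl
  | cons a t ih =>
    simp only [List.flatMap_cons, h a (by simp)]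
    rw [ih (fun x hx => h x (List.mem_cons_of_mem _ hx))]

theorem pv_getD_take {α : Type} (l : List α) (n j : Nat) (d : α) (h : j < n) :
    (l.take n).getD j d = l.getD j d := by
  rw [List.getD_eq_getElem?_getD, List.getD_eq_getElem?_getD, List.getElem?_take]
  rw [if_pos h]

-- a foldl that keeps overwriting with the last match computes the first match of the reverse
theorem pv_foldl_overwrite {α : Type} (p : α → Bool) :
    ∀ (l : List α) (g0 : Option α),
    l.foldl (fun g x => if p x then some x else g) g0 = (l.reverse.find? p).or g0 := by
  intro l
  induction l with
  | nil => intro g0; simp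
  | cons a t ih =>
    intro g0
    rw [List.foldl_cons, ih, List.reverse_cons, List.find?_append]
    by_cases hp : p a <;> simp [List.find?, hp, Option.or_assoc]

-- B's reversed-scan first match = A's overwrite-to-last scan
theorem pv_goal_desc (rows : List (List Char)) (nI mI : Int) :
    ((PySem.List.pyRange (nI - 1) (-1) (-1)).flatMap (fun i =>
      (PySem.List.pyRange (mI - 1) (-1) (-1)).map (fun j => (i, j)))).find?
        (fun p => pvCellB rows p.1 p.2 == 'G')
    = (PySem.List.pyRange 0 nI 1).foldl (fun g i =>
        (PySem.List.pyRange 0 mI 1).foldl (fun g j =>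
          if pvCellB rows i j = 'G' then some (i, j) else g) g) none := by
  have h1 : PySem.List.pyRange (nI - 1) (-1) (-1) = (PySem.List.pyRange 0 nI 1).reverse := by
    rw [PySem.List.pyRange_neg_one_eq_reverse,
      show (-1 : Int) + 1 = 0 from by ring, show nI - 1 + 1 = nI from by ring]
  have h2 : PySem.List.pyRange (mI - 1) (-1) (-1) = (PySem.List.pyRange 0 mI 1).reverse := by
    rw [PySem.List.pyRange_neg_one_eq_reverse,
      show (-1 : Int) + 1 = 0 from by ring, show mI - 1 + 1 = mI from by ring]
  have h3 : (PySem.List.pyRange 0 nI 1).reverse.flatMap (fun i =>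
      ((PySem.List.pyRange 0 mI 1).reverse.map (fun j => (i, j))))
    = ((PySem.List.pyRange 0 nI 1).flatMap (fun i =>
        (PySem.List.pyRange 0 mI 1).map (fun j => (i, j)))).reverse := by
    rw [List.reverse_flatMap]
    apply pv_flatMap_congr
    intro i _
    simp [Function.comp_def, List.map_reverse]
  rw [h1, h2, h3]
  have h4 := pv_foldl_overwrite (fun p : Int × Int => pvCellB rows p.1 p.2 == 'G')
    ((PySem.List.pyRange 0 nI 1).flatMap (fun i =>
      (PySem.List.pyRange 0 mI 1).map (fun j => (i, j)))) none
  rw [Option.or_none] at h4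
  rw [← h4, List.foldl_flatMap]
  have houter : (fun (a : Option (Int × Int)) (i : Int) =>
      ((PySem.List.pyRange 0 mI 1).map (fun j => (i, j))).foldl
        (fun g x => if pvCellB rows x.1 x.2 == 'G' then some x else g) a)
    = (fun g i => (PySem.List.pyRange 0 mI 1).foldl
        (fun g j => if pvCellB rows i j = 'G' then some (i, j) else g) g) := by
    funext a i
    rw [List.foldl_map]
    congr 1
    funext g j
    by_cases h : pvCellB rows i j = 'G' <;> simp [h]
  rw [houter]

theorem pv_main (board : List String) (hpre : Pre_solution board) :
    solution board = solution_alt board := by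
  obtain ⟨hbne, hrowlen, -⟩ := hpre
  set nN := board.length with hnN
  set mN := (board.headD "").toList.length with hmN
  have hn : PySem.List.len board = (nN : Int) := by
    rw [PySem.List.len_eq, hnN]
  have hm : PySem.Str.len ((PySem.List.pyGet? board 0).getD "") = (mN : Int) := by
    cases board with
    | nil => exact absurd rfl hbne
    | cons r t =>
      rw [PySem.List.pyGet?_zero_cons]
      simp [PySem.Str.len_eq, hmN]
  have hboard_get : ∀ i : Nat, i < nN → board.getD i "" ∈ board := by
    intro i hi
    rw [List.getD_eq_getElem?_getD, List.getElem?_eq_getElem (by omega)]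
    exact List.getElem_mem _
  simp only [solution, solution_alt, hn, hm]
  rw [pv_scan_split]
  simp only [Int.toNat_natCast]
  -- abbreviations
  set rows : List (List Char) :=
    board.map (fun r => PySem.List.slice r.toList none (some ((mN : Nat) : Int))) with hrowsdef
  set cols : List (List Char) :=
    (PySem.List.pyRange 0 ((mN : Nat) : Int) 1).map
      (fun j => rows.map (fun r => PySem.List.pyGetD r j ' ')) with hcolsdef
  -- row/col facts
  have hrows_len : rows.length = nN := by simp [hrowsdef, hnN]
  have hrow_get : ∀ i : Nat, i < nN →
      rows.getD i [] = ((board.getD i "").toList).take mN := by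
    intro i hi
    rw [hrowsdef, List.getD_eq_getElem?_getD, List.getElem?_map,
      List.getElem?_eq_getElem (by simpa using hi)]
    simp only [Option.map_some, Option.getD_some]
    rw [PySem.List.slice_to_natCast]
    congr 1
    rw [List.getD_eq_getElem?_getD, List.getElem?_eq_getElem (by omega)]
    rfl
  have hrow_len : ∀ i : Nat, i < nN → (rows.getD i []).length = mN := by
    intro i hi
    rw [hrow_get i hi, List.length_take]
    have := hrowlen _ (hboard_get i hi)
    omega
  have hrow_cell : ∀ i j : Nat, i < nN → j < mN →
      pvCellOf (rows.getD i []) j = pvCellN board i j := by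
    intro i j hi hj
    unfold pvCellOf pvCellN
    rw [hrow_get i hi, pv_getD_take _ _ _ _ hj]
  have hcols_len : cols.length = mN := by
    simp [hcolsdef, PySem.List.length_pyRange_one]
  have hcols_get : ∀ j : Nat, j < mN →
      cols.getD j [] = rows.map (fun r => PySem.List.pyGetD r (j : Int) ' ') := by
    intro j hj
    rw [hcolsdef, List.getD_eq_getElem?_getD, List.getElem?_map,
      PySem.List.getElem?_pyRange_one]
    rw [if_pos (by simpa using hj)]
    simp
  have hcol_len : ∀ j : Nat, j < mN → (cols.getD j []).length = nN := by
    intro j hj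
    rw [hcols_get j hj]
    simp [hrows_len]
  have hcol_cell : ∀ j i : Nat, j < mN → i < nN →
      pvCellOf (cols.getD j []) i = pvCellN board i j := by
    intro j i hj hi
    rw [hcols_get j hj]
    unfold pvCellOf
    rw [List.getD_eq_getElem?_getD, List.getElem?_map,
      List.getElem?_eq_getElem (by omega)]
    simp only [Option.map_some, Option.getD_some, PySem.List.pyGetD_natCast]
    have : rows[i] = rows.getD i [] := by
      rw [List.getD_eq_getElem?_getD, List.getElem?_eq_getElem (by omega)]
      rfl
    rw [this, ← pvCellOf, hrow_cell i j hi hj]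
  have hcellB : ∀ a b : Nat, a < nN → b < mN →
      pvCellB rows (a : Int) (b : Int) = pvCellN board a b := by
    intro a b ha hb
    unfold pvCellB
    rw [PySem.List.pyGetD_natCast, PySem.List.pyGetD_natCast]
    exact hrow_cell a b ha hb
  have hhorL : ∀ a : Nat, a < nN →
      PySem.List.pyGetD (rows.map pvDests) (a : Int) ([], []) = pvDests (rows.getD a []) := by
    intro a ha
    rw [PySem.List.pyGetD_natCast, List.getD_eq_getElem?_getD, List.getElem?_map,
      List.getElem?_eq_getElem (show a < rows.length by omega)]
    simp only [Option.map_some, Option.getD_some]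
    congr 1
    rw [List.getD_eq_getElem?_getD, List.getElem?_eq_getElem (by omega)]
    rfl
  have hvertL : ∀ b : Nat, b < mN →
      PySem.List.pyGetD (cols.map pvDests) (b : Int) ([], []) = pvDests (cols.getD b []) := by
    intro b hb
    rw [PySem.List.pyGetD_natCast, List.getD_eq_getElem?_getD, List.getElem?_map,
      List.getElem?_eq_getElem (show b < cols.length by omega)]
    simp only [Option.map_some, Option.getD_some]
    congr 1
    rw [List.getD_eq_getElem?_getD, List.getElem?_eq_getElem (by omega)]
    rfl
  -- the three scan components
  have hscanv := pv_scanv_fold board nN mN nN le_rfl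
  -- starts = A's queue
  have hstart : (PySem.List.pyRange 0 ((nN : Nat) : Int) 1).flatMap (fun i =>
      ((PySem.List.pyRange 0 ((mN : Nat) : Int) 1).filter
        (fun j => pvCellB rows i j == 'R')).map (fun j => (i, j)))
      = (PySem.List.pyRange 0 ((nN : Nat) : Int) 1).foldl (fun q i =>
        (PySem.List.pyRange 0 ((mN : Nat) : Int) 1).foldl (fun q j =>
          if pvCellA board i j = 'R' then q ++ [(i, j)] else q) q) [] := by
    have hfq : (fun (q : List (Int × Int)) (i : Int) =>
        (PySem.List.pyRange 0 ((mN : Nat) : Int) 1).foldl (fun q j =>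
          if pvCellA board i j = 'R' then q ++ [(i, j)] else q) q)
      = (fun q i => q ++ ((PySem.List.pyRange 0 ((mN : Nat) : Int) 1).filter
          (fun j => decide (pvCellA board i j = 'R'))).map (fun j => (i, j))) := by
      funext q i
      exact PySem.List.foldl_append_ite (fun j => pvCellA board i j = 'R') (fun j => (i, j))
        (PySem.List.pyRange 0 ((mN : Nat) : Int) 1) q
    rw [hfq, PySem.List.foldl_append_eq_flatMap, List.nil_append]
    apply pv_flatMap_congr
    intro i hi
    rw [PySem.List.mem_pyRange_one] at hi
    obtain ⟨a, rfl⟩ : ∃ a : Nat, i = (a : Int) :=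
      ⟨i.toNat, (Int.toNat_of_nonneg hi.1).symm⟩
    congr 1
    apply List.filter_congr
    intro j hj
    rw [PySem.List.mem_pyRange_one] at hj
    obtain ⟨b, rfl⟩ : ∃ b : Nat, j = (b : Int) :=
      ⟨j.toNat, (Int.toNat_of_nonneg hj.1).symm⟩
    have h1 : pvCellA board (a : Int) (b : Int) = pvCellN board a b := by
      rw [pv_cellA_eq _ _ _ (Int.natCast_nonneg a) (Int.natCast_nonneg b),
        Int.toNat_natCast, Int.toNat_natCast]
    have h2 := hcellB a b (by exact_mod_cast hi.2) (by exact_mod_cast hj.2)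
    rw [pv_beq_decide, h1, h2]
  -- goal scans agree: B's reversed find?, A's overwriting double foldl
  have hgoal_eq : (PySem.List.pyRange 0 ((nN : Nat) : Int) 1).foldl (fun g i =>
      (PySem.List.pyRange 0 ((mN : Nat) : Int) 1).foldl (fun g j =>
        if pvCellB rows i j = 'G' then some (i, j) else g) g) (none : Option (Int × Int))
      = (PySem.List.pyRange 0 ((nN : Nat) : Int) 1).foldl (fun g i =>
      (PySem.List.pyRange 0 ((mN : Nat) : Int) 1).foldl (fun g j =>
        if pvCellA board i j = 'G' then some (i, j) else g) g) (none : Option (Int × Int)) := by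
    apply PySem.List.foldl_congr_mem
    intro acc i hi
    rw [PySem.List.mem_pyRange_one] at hi
    obtain ⟨a, rfl⟩ : ∃ a : Nat, i = (a : Int) :=
      ⟨i.toNat, (Int.toNat_of_nonneg hi.1).symm⟩
    apply PySem.List.foldl_congr_mem
    intro acc2 j hj
    rw [PySem.List.mem_pyRange_one] at hj
    obtain ⟨b, rfl⟩ : ∃ b : Nat, j = (b : Int) :=
      ⟨j.toNat, (Int.toNat_of_nonneg hj.1).symm⟩
    have h1 : pvCellA board (a : Int) (b : Int) = pvCellN board a b := by
      rw [pv_cellA_eq _ _ _ (Int.natCast_nonneg a) (Int.natCast_nonneg b),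
        Int.toNat_natCast, Int.toNat_natCast]
    have h2 := hcellB a b (by exact_mod_cast hi.2) (by exact_mod_cast hj.2)
    rw [h1, h2]
  rw [hstart, pv_goal_desc, hgoal_eq]
  set Qs := (PySem.List.pyRange 0 ((nN : Nat) : Int) 1).foldl (fun q i =>
      (PySem.List.pyRange 0 ((mN : Nat) : Int) 1).foldl (fun q j =>
        if pvCellA board i j = 'R' then q ++ [(i, j)] else q) q) [] with hQsdef
  -- membership in the queue
  have hmem : ∀ p : Int × Int, p ∈ Qs ↔
      ∃ a b : Nat, p = ((a : Int), (b : Int)) ∧ a < nN ∧ b < mN ∧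
        pvCellN board a b = 'R' := by
    intro p
    rw [← hstart]
    constructor
    · intro hp
      rw [List.mem_flatMap] at hp
      obtain ⟨i, hi, hp⟩ := hp
      rw [List.mem_map] at hp
      obtain ⟨j, hjf, rfl⟩ := hp
      rw [List.mem_filter] at hjf
      obtain ⟨hj, hcl⟩ := hjf
      rw [PySem.List.mem_pyRange_one] at hi hj
      obtain ⟨a, rfl⟩ : ∃ a : Nat, i = (a : Int) :=
        ⟨i.toNat, (Int.toNat_of_nonneg hi.1).symm⟩
      obtain ⟨b, rfl⟩ : ∃ b : Nat, j = (b : Int) :=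
        ⟨j.toNat, (Int.toNat_of_nonneg hj.1).symm⟩
      refine ⟨a, b, rfl, by exact_mod_cast hi.2, by exact_mod_cast hj.2, ?_⟩
      rw [← hcellB a b (by exact_mod_cast hi.2) (by exact_mod_cast hj.2)]
      exact eq_of_beq hcl
    · rintro ⟨a, b, rfl, ha, hb, hcell⟩
      rw [List.mem_flatMap]
      refine ⟨(a : Int), PySem.List.mem_pyRange_one.mpr
        ⟨Int.natCast_nonneg a, by exact_mod_cast ha⟩, ?_⟩
      rw [List.mem_map]
      refine ⟨(b : Int), ?_, rfl⟩
      rw [List.mem_filter]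
      refine ⟨PySem.List.mem_pyRange_one.mpr
        ⟨Int.natCast_nonneg b, by exact_mod_cast hb⟩, ?_⟩
      rw [hcellB a b ha hb, hcell]
      rfl
  -- initial relation and queue invariant
  have hRel0 : pvRel nN mN
      ((PySem.List.pyRange 0 ((nN : Nat) : Int) 1).foldl (fun v i =>
        (PySem.List.pyRange 0 ((mN : Nat) : Int) 1).foldl (fun v j =>
          if pvCellA board i j = 'R' then pvVSet v i j 1 else v) v)
        (List.replicate nN (List.replicate mN 0)))
      (Qs.foldl
        (fun d s => d.insert s 0) (PySem.Dict.empty : PySem.Dict (Int × Int) Int)) := by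
    refine ⟨hscanv.1, hscanv.2.1, ?_⟩
    intro i j hi hj
    rw [hscanv.2.2 i j hi hj, pv_dist_get?, PySem.Dict.get?_empty]
    by_cases hR : pvCellN board i j = 'R'
    · rw [if_pos ⟨hi, hR⟩, if_pos ((hmem _).mpr ⟨i, j, rfl, hi, hj, hR⟩)]
      refine ⟨by omega, ?_, fun _ => by norm_num⟩
      constructor
      · intro h; exact absurd h (by norm_num)
      · intro h; exact absurd h (by simp)
    · rw [if_neg (by tauto), if_neg (by
        intro hc
        obtain ⟨a, b, hab, -, -, hcell⟩ := (hmem _).mp hc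
        simp only [Prod.mk.injEq, Int.natCast_inj] at hab
        obtain ⟨rfl, rfl⟩ := hab
        exact hR hcell)]
      exact ⟨le_refl 0, by simp, fun h => absurd rfl h⟩
  have hQ0 : pvQInv board nN mN
      ((PySem.List.pyRange 0 ((nN : Nat) : Int) 1).foldl (fun v i =>
        (PySem.List.pyRange 0 ((mN : Nat) : Int) 1).foldl (fun v j =>
          if pvCellA board i j = 'R' then pvVSet v i j 1 else v) v)
        (List.replicate nN (List.replicate mN 0)))
      Qs := by
    intro p hp
    obtain ⟨a, b, rfl, ha, hb, hcell⟩ := (hmem p).mp hp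
    refine ⟨a, b, rfl, ha, hb, by rw [hcell]; decide, ?_⟩
    rw [hscanv.2.2 a b ha hb, if_pos ⟨ha, hcell⟩]
    omega
  -- goal correspondence and conclusion
  cases hgv : (PySem.List.pyRange 0 ((nN : Nat) : Int) 1).foldl (fun g i =>
      (PySem.List.pyRange 0 ((mN : Nat) : Int) 1).foldl (fun g j =>
        if pvCellA board i j = 'G' then some (i, j) else g) g)
      (none : Option (Int × Int)) with
  | none =>
    have hsim := pv_bfs_sim board nN mN _ _ none ((-1 : Int)) ((-1 : Int))
      (by
        intro xi yj _ _
        constructor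
        · rintro ⟨h1, -⟩
          have := Int.natCast_nonneg xi
          omega
        · intro hc
          exact absurd hc (by simp))
      (by
        intro xi yj hxi hyj hcell
        exact pv_dir_down board nN mN _ (cols.getD yj []) xi yj hxi hyj (hvertL yj hyj)
          (hcol_len yj hyj) (fun k hk => hcol_cell yj k hyj hk) hcell)
      (by
        intro xi yj hxi hyj hcell
        exact pv_dir_up board nN mN _ (cols.getD yj []) xi yj hxi hyj (hvertL yj hyj)
          (hcol_len yj hyj) (fun k hk => hcol_cell yj k hyj hk) hcell)
      (by
        intro xi yj hxi hyj hcell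
        exact pv_dir_left board nN mN _ (rows.getD xi []) xi yj hxi hyj (hhorL xi hxi)
          (hrow_len xi hxi) (fun k hk => hrow_cell xi k hxi hk) hcell)
      (by
        intro xi yj hxi hyj hcell
        exact pv_dir_right board nN mN _ (rows.getD xi []) xi yj hxi hyj (hhorL xi hxi)
          (hrow_len xi hxi) (fun k hk => hrow_cell xi k hxi hk) hcell)
      (((nN : Int) * (mN : Int)).toNat) Qs 0 _ _ hRel0
      (by rw [List.drop_zero]; exact hQ0) (Nat.zero_le _)
    rw [List.drop_zero] at hsim
    exact hsim
  | some ab =>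
    obtain ⟨ga, gb⟩ := ab
    have hsim := pv_bfs_sim board nN mN _ _ (some (ga, gb)) ga gb
      (by
        intro xi yj _ _
        constructor
        · rintro ⟨h1, h2⟩
          rw [← h1, ← h2]
        · intro hc
          rw [Option.some.injEq, Prod.mk.injEq] at hc
          exact ⟨hc.1.symm, hc.2.symm⟩)
      (by
        intro xi yj hxi hyj hcell
        exact pv_dir_down board nN mN _ (cols.getD yj []) xi yj hxi hyj (hvertL yj hyj)
          (hcol_len yj hyj) (fun k hk => hcol_cell yj k hyj hk) hcell)
      (by
        intro xi yj hxi hyj hcell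
        exact pv_dir_up board nN mN _ (cols.getD yj []) xi yj hxi hyj (hvertL yj hyj)
          (hcol_len yj hyj) (fun k hk => hcol_cell yj k hyj hk) hcell)
      (by
        intro xi yj hxi hyj hcell
        exact pv_dir_left board nN mN _ (rows.getD xi []) xi yj hxi hyj (hhorL xi hxi)
          (hrow_len xi hxi) (fun k hk => hrow_cell xi k hxi hk) hcell)
      (by
        intro xi yj hxi hyj hcell
        exact pv_dir_right board nN mN _ (rows.getD xi []) xi yj hxi hyj (hhorL xi hxi)
          (hrow_len xi hxi) (fun k hk => hrow_cell xi k hxi hk) hcell)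
      (((nN : Int) * (mN : Int)).toNat) Qs 0 _ _ hRel0
      (by rw [List.drop_zero]; exact hQ0) (Nat.zero_le _)
    rw [List.drop_zero] at hsim
    exact hsim

-- ===== VERDICT (by name: the statement is the Claim_ definition above) =====
theorem solution_spec : Claim_equal_solution := by
  intro board _ hpre
  unfold Spec_solution
  exact pv_main board hpre
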